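-- pv_equiv track=rewrite | github.com/nahiyan/cryptanalysis | 2bit-cnds/propagator.py | naive_derive_step
-- ===== SOURCE A (Python) =====
-- from itertools import product
--
-- def _int_diff(word):
--     n = len(word)
--     value = 0
--     for i in range(n):
--         gc_bit = word[n - 1 - i]
--         if gc_bit not in ["u", "n", "-", "1", "0"]:
--             return value, True
--         value += (1 if gc_bit == "u" else -1 if gc_bit == "n" else 0) * pow(2, i)
--     return value % pow(2, n), False
--
-- def naive_derive_step(word_x, word_y, constant):
--     table = {
--         "?": ["n", "u", "-"],
--         "x": ["n", "u"],
--         "3": ["0", "u"],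
--         "5": ["0", "n"],
--         "7": ["0", "u", "n"],
--         "A": ["u", "1"],
--         "B": ["u", "-"],
--         "C": ["n", "1"],
--         "D": ["n", "-"],
--         "E": ["u", "n", "1"],
--     }
--     conforms = lambda x, y, table: True if x in table[y] else False
--     flatten = lambda l: [item for sublist in l for item in sublist]
--
--     possible_gcs = set(
--         flatten([table[x] if x in table else [x] for x in word_x + word_y])
--     )
--
--     subject = word_x + word_y
--     holes = []
--     for i, c in enumerate(subject):
--         if c in table:
--             holes.append(i)
--     n = len(holes)
--     combos = product(possible_gcs, repeat=n)
--     combos_count = int(pow(len(possible_gcs), n))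
--     # if combos_count >= 1e10:
--     #     return "".join(word_x), "".join(word_y)
--     m = int(len(subject) / 2)
--     matches = []
--     for combo in combos:
--         new_subject = list(subject)
--         skip = False
--         for i, hole in enumerate(holes):
--             original_v = subject[hole]
--             if not conforms(combo[i], original_v, table):
--                 skip = True
--                 break
--             new_subject[hole] = combo[i]
--         if not skip:
--             new_subject = "".join(new_subject)
--             parts = (new_subject[:m], new_subject[m:])
--             (c1, _), (c2, _) = _int_diff(parts[0]), _int_diff(parts[1])
--             c = (c1 + c2) & (pow(2, m) - 1)
--             if c == constant:
--                 matches.append(new_subject)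
--     commons = list(subject)
--     for i in holes:
--         col = []
--         for match_ in matches:
--             col.append(match_[i])
--         if len(set(col)) == 1:
--             commons[i] = col[0]
--     commons = "".join(commons)
--     derived_word_x, derived_word_y = commons[:m], commons[m:]
--     return derived_word_x, derived_word_y
-- ===== SOURCE B (Python) =====
-- _TABLE = {"?": "nu-", "x": "nu", "3": "0u", "5": "0n", "7": "0un",
--           "A": "u1", "B": "u-", "C": "n1", "D": "n-", "E": "un1"}
--
--
-- def _dig(v):
--     return 1 if v == "u" else -1 if v == "n" else 0
--
--
-- def _scan_part(part, hole_bits):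
--     # From the LSB: accumulate the signed value of the fixed chars, stopping at
--     # the first fixed char that is not a valid gc symbol; bits at or above that
--     # index never contribute.  Returns (stop_index, base_value).
--     n = len(part)
--     base = 0
--     for i in range(n):
--         ch = part[n - 1 - i]
--         if i in hole_bits:
--             continue
--         if ch == "u":
--             base += 1 << i
--         elif ch == "n":
--             base -= 1 << i
--         elif ch not in "-01":
--             return i, base
--     return n, base
--
--
-- def naive_derive_step(word_x, word_y, constant):
--     subject = word_x + word_y
--     L = len(subject)
--     m = L // 2
--     mod = 1 << m
--     if constant < 0 or constant >= mod:
--         # no assignment can reach a target outside [0, 2**m)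
--         return subject[:m], subject[m:]
--     holes = [j for j in range(L) if subject[j] in _TABLE]
--     t1, b1 = _scan_part(subject[:m], {m - 1 - j for j in holes if j < m})
--     t2, b2 = _scan_part(subject[m:], {L - 1 - j for j in holes if j >= m})
--
--     def w(j):
--         i = m - 1 - j if j < m else L - 1 - j
--         t = t1 if j < m else t2
--         return (1 << i) if i < t else 0
--
--     contrib = [[_dig(v) * w(j) for v in _TABLE[subject[j]]] for j in holes]
--     # forward residue sets: fsets[k] = residues of base + holes < k
--     fsets = []
--     f = {(b1 + b2) % mod}
--     for con in contrib:
--         fsets.append(f)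
--         f = {(fv + d) % mod for fv in f for d in con}
--     # backward residue sets: bsets[k] = residues contributed by holes > k
--     bsets = []
--     b = {0}
--     for con in reversed(contrib):
--         bsets.append(b)
--         b = {(d + bv) % mod for d in con for bv in b}
--     bsets.reverse()
--     res = list(subject)
--     for j, con, fk, bn in zip(holes, contrib, fsets, bsets):
--         ach = [v for v, d in zip(_TABLE[subject[j]], con)
--                if any((constant - d - bv) % mod in fk for bv in bn)]
--         if len(ach) == 1:
--             res[j] = ach[0]
--     return "".join(res[:m]), "".join(res[m:])
-- ===== Notes on version B (the rewrite author's own statement) =====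
-- stated objective: alternative
-- what changed: Instead of enumerating every |possible_gcs|^n hole tuple, rebuilding the string and re-scanning both halves for each one, B precomputes one linear form (base value plus a signed power-of-two weight per hole), runs a forward and a backward dynamic programme over the holes on sets of achievable residues mod 2^m, and decides for each hole which candidate digits can occur in a solution by one set lookup per residue, forcing a column exactly when one candidate survives.
import Mathlib
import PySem

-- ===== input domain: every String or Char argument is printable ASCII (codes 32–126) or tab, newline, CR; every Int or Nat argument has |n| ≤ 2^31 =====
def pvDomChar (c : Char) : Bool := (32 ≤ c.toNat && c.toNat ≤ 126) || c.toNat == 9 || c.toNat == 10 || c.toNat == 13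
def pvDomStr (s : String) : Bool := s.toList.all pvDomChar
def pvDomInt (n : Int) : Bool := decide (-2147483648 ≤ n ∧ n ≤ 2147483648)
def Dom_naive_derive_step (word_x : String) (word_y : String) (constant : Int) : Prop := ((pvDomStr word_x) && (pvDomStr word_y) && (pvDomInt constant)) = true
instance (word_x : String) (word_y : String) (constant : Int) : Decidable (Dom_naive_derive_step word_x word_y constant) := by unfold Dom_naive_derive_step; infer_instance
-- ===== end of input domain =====

-- B replaces A's enumeration of all |possible_gcs|^n hole tuples (each evaluated by rebuilding
-- the string and re-scanning it) by a forward/backward dynamic programme over the holes on sets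
-- of residues mod 2^m of a precomputed linear column value, deciding for each hole which
-- candidate digits are achievable (a genuinely different algorithm; no product enumeration).


-- ===== PORT A =====

-- the `table` dict of A (a static literal): keys looked up one char at a time
def pvTableA (c : Char) : Option (List Char) :=
  if c = '?' then some ['n', 'u', '-']
  else if c = 'x' then some ['n', 'u']
  else if c = '3' then some ['0', 'u']
  else if c = '5' then some ['0', 'n']
  else if c = '7' then some ['0', 'u', 'n']
  else if c = 'A' then some ['u', '1']
  else if c = 'B' then some ['u', '-']
  else if c = 'C' then some ['n', '1']
  else if c = 'D' then some ['n', '-']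
  else if c = 'E' then some ['u', 'n', '1']
  else none

-- conforms = lambda x, y, table: True if x in table[y] else False  (only called with y a table key)
def pvConformsA (x y : Char) : Bool := ((pvTableA y).getD []).contains x

-- _int_diff's loop: for i in range(n): gc_bit = word[n-1-i]  (= reverse position i)
def pvIntDiffGoA (n : Nat) : List Char → Nat → Int → Int × Bool
  | [], _, value => (PySem.Int.mod value (2 ^ n), false)
  | gcBit :: rest, i, value =>
    if ¬ (['u', 'n', '-', '1', '0'].contains gcBit) then (value, true)
    else pvIntDiffGoA n rest (i + 1)
      (value + (if gcBit = 'u' then 1 else if gcBit = 'n' then -1 else 0) * 2 ^ i)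

def pvIntDiffA (word : List Char) : Int × Bool := pvIntDiffGoA word.length word.reverse 0 0

-- itertools.product(pool, repeat=n) (leftmost position varies slowest)
def pvProductRepeatA (pool : List Char) : Nat → List (List Char)
  | 0 => [[]]
  | n + 1 => (pool.map (fun v => (pvProductRepeatA pool n).map (fun rest => v :: rest))).flatten

-- the inner combo loop: conformance check with break, filling new_subject hole by hole
def pvFillA (subject : List Char) : List (Int × Char) → List Char → Option (List Char)
  | [], newSubject => some newSubject
  | (hole, v) :: rest, newSubject =>
    if ¬ pvConformsA v (PySem.List.pyGetD subject hole ' ') then none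
    else pvFillA subject rest (PySem.List.pySetD newSubject hole v)

def naive_derive_step (word_x : String) (word_y : String) (constant : Int) : String × String :=
  let subject : List Char := word_x.toList ++ word_y.toList
  let possible_gcs : PySem.Set Char :=
    PySem.Set.ofList ((subject.map (fun x => match pvTableA x with | some l => l | none => [x])).flatten)
  let holes : List Int :=
    ((PySem.List.enumerate subject).filter (fun p => (pvTableA p.2).isSome)).map Prod.fst
  let n : Nat := holes.length
  let combos : List (List Char) := pvProductRepeatA possible_gcs n
  let _combos_count : Nat := possible_gcs.length ^ n   -- combos_count (unused in A as well)
  let m : Nat := subject.length / 2                    -- int(len(subject)/2)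
  let matches_ : List (List Char) := combos.foldl (fun acc combo =>
    match pvFillA subject (holes.zip combo) subject with
    | none => acc                                      -- skip
    | some new_subject =>
      -- parts = (new_subject[:m], new_subject[m:]) : slices with 0 ≤ m ≤ len are take/drop
      let c1 := (pvIntDiffA (new_subject.take m)).1
      let c2 := (pvIntDiffA (new_subject.drop m)).1
      let c := PySem.Int.band (c1 + c2) (2 ^ m - 1)
      if c = constant then acc ++ [new_subject] else acc) []
  let commons : List Char := holes.foldl (fun commons i =>
    let col : List Char := matches_.map (fun match_ => PySem.List.pyGetD match_ i ' ')
    if PySem.Set.len (PySem.Set.ofList col) = 1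
    then PySem.List.pySetD commons i (col.headD ' ')   -- col[0]: nonempty since len(set(col)) == 1
    else commons) subject
  (String.mk (commons.take m), String.mk (commons.drop m))

-- ===== PORT B =====

-- B's _TABLE dict (string-valued candidate lists)
def pvTabB (c : Char) : Option String :=
  match c with
  | '?' => some "nu-" | 'x' => some "nu" | '3' => some "0u" | '5' => some "0n"
  | '7' => some "0un" | 'A' => some "u1" | 'B' => some "u-" | 'C' => some "n1"
  | 'D' => some "n-" | 'E' => some "un1" | _ => none

-- _dig
def pvDigB (v : Char) : Int := if v = 'u' then 1 else if v = 'n' then -1 else 0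

-- _scan_part's loop: for i in range(n) reading part[n-1-i], early return at first fixed invalid char
-- (bit indices are nonnegative throughout, kept as Nat)
def pvScanGoB (part : List Char) (n : Nat) (holeBits : PySem.Set Nat) : List Nat → Int → Nat × Int
  | [], base => (n, base)
  | i :: rest, base =>
    let ch := part.getD (n - 1 - i) ' '
    if holeBits.contains i then pvScanGoB part n holeBits rest base
    else if ch = 'u' then pvScanGoB part n holeBits rest (base + 2 ^ i)
    else if ch = 'n' then pvScanGoB part n holeBits rest (base - 2 ^ i)
    else if ¬ (ch = '-' ∨ ch = '0' ∨ ch = '1') then (i, base)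
    else pvScanGoB part n holeBits rest base

def pvScanPartB (part : List Char) (holeBits : PySem.Set Nat) : Nat × Int :=
  pvScanGoB part part.length holeBits (List.range part.length) 0

-- forward loop: fsets collects f before each step, f is updated by a set comprehension
def pvFwdB (md : Int) : List (List Int) → PySem.Set Int → List (PySem.Set Int)
  | [], _ => []
  | con :: rest, f =>
    f :: pvFwdB md rest
      (PySem.Set.ofList (f.flatMap (fun fv => con.map (fun d => PySem.Int.mod (fv + d) md))))

-- backward loop over reversed(contrib), prepending (= append then reverse)
def pvBwdB (md : Int) : List (List Int) → PySem.Set Int → List (PySem.Set Int) → List (PySem.Set Int)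
  | [], _, acc => acc
  | con :: rest, b, acc =>
    pvBwdB md rest
      (PySem.Set.ofList (con.flatMap (fun d => b.map (fun bv => PySem.Int.mod (d + bv) md))))
      (b :: acc)

def naive_derive_step_alt (word_x : String) (word_y : String) (constant : Int) : String × String :=
  let subject : List Char := word_x.toList ++ word_y.toList
  let L : Nat := subject.length
  let m : Nat := L / 2
  let md : Int := 2 ^ m
  if constant < 0 ∨ md ≤ constant then
    -- no assignment can reach a target outside [0, 2**m)
    (String.mk (subject.take m), String.mk (subject.drop m))
  else
    let holes : List Nat := (List.range L).filter (fun j => (pvTabB (subject.getD j ' ')).isSome)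
    let s1 : Nat × Int := pvScanPartB (subject.take m)
      (PySem.Set.ofList ((holes.filter (fun j => j < m)).map (fun j => m - 1 - j)))
    let s2 : Nat × Int := pvScanPartB (subject.drop m)
      (PySem.Set.ofList ((holes.filter (fun j => ¬ j < m)).map (fun j => L - 1 - j)))
    let w : Nat → Int := fun j =>
      let i := if j < m then m - 1 - j else L - 1 - j
      let t := if j < m then s1.1 else s2.1
      if i < t then 2 ^ i else 0
    let contrib : List (List Int) := holes.map (fun j =>
      ((pvTabB (subject.getD j ' ')).getD "").toList.map (fun v => pvDigB v * w j))
    let fsets : List (PySem.Set Int) :=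
      pvFwdB md contrib (PySem.Set.ofList [PySem.Int.mod (s1.2 + s2.2) md])
    let bsets : List (PySem.Set Int) :=
      pvBwdB md contrib.reverse (PySem.Set.ofList [(0 : Int)]) []
    let res : List Char := ((holes.zip contrib).zip (fsets.zip bsets)).foldl (fun res p =>
      let ach : List Char :=
        (((pvTabB (subject.getD p.1.1 ' ')).getD "").toList.zip p.1.2).filterMap (fun vd =>
          if p.2.2.any (fun bv => PySem.Set.contains p.2.1 (PySem.Int.mod (constant - vd.2 - bv) md))
          then some vd.1 else none)
      if ach.length = 1 then res.set p.1.1 (ach.headD ' ') else res) subject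
    (String.mk (res.take m), String.mk (res.drop m))

-- ===== PRECONDITION & SPEC =====
def Spec_naive_derive_step (word_x : String) (word_y : String) (constant : Int) (out : String × String) : Prop := out = naive_derive_step_alt word_x word_y constant
instance (word_x : String) (word_y : String) (constant : Int) (out : String × String) : Decidable (Spec_naive_derive_step word_x word_y constant out) := by unfold Spec_naive_derive_step; infer_instance

-- ===== CLAIM (what is proved, stated in full; the proofs are below) =====
def Claim_equal_naive_derive_step : Prop := ∀ (word_x : String) (word_y : String) (constant : Int), Dom_naive_derive_step word_x word_y constant → Spec_naive_derive_step word_x word_y constant (naive_derive_step word_x word_y constant)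

-- ===== LEMMAS AND PROOFS =====

-- ---------- proof-side bit-level helpers ----------

def pvValid (c : Char) : Bool := (['u', 'n', '-', '1', '0'] : List Char).contains c

-- value of a (filled, hence all-holes-valid) reversed part, scanning until the first invalid char
def pvPrefVal : List Char → Nat → Int
  | [], _ => 0
  | c :: r, i => if pvValid c then pvDigB c * 2 ^ i + pvPrefVal r (i + 1) else 0

-- structural description of B's scan: original reversed part, hole-bit predicate
def pvScanZ (hb : Nat → Bool) : List Char → Nat → Nat × Int
  | [], i => (i, 0)
  | c :: r, i =>
    if hb i then pvScanZ hb r (i + 1)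
    else if pvValid c then
      ((pvScanZ hb r (i + 1)).1, (pvScanZ hb r (i + 1)).2 + pvDigB c * 2 ^ i)
    else (i, 0)

-- reversed part with hole bits replaced by the assignment a
def pvFillRev (hb : Nat → Bool) (a : Nat → Char) : List Char → Nat → List Char
  | [], _ => []
  | c :: r, i => (if hb i then a i else c) :: pvFillRev hb a r (i + 1)

-- contribution of the assigned hole bits, truncated at t
def pvHoleSum (hb : Nat → Bool) (a : Nat → Char) (t : Nat) (bits : List Nat) : Int :=
  (bits.map (fun k => if hb k then pvDigB (a k) * (if k < t then 2 ^ k else 0) else 0)).sum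

theorem pvValid_eq (c : Char) :
    pvValid c = (c == 'u' || c == 'n' || c == '-' || c == '1' || c == '0') := by
  simp [pvValid, List.contains_eq_mem, decide_eq_true_eq]
  by_cases h1 : c = 'u' <;> by_cases h2 : c = 'n' <;> by_cases h3 : c = '-' <;>
    by_cases h4 : c = '1' <;> by_cases h5 : c = '0' <;> simp [h1, h2, h3, h4, h5]

theorem pvScanZ_fst_ge (hb : Nat → Bool) :
    ∀ (r : List Char) (i : Nat), i ≤ (pvScanZ hb r i).1 := by
  intro r
  induction r with
  | nil => intro i; simp [pvScanZ]
  | cons c r ih =>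
    intro i
    simp only [pvScanZ]
    split_ifs with h1 h2
    · exact le_trans (Nat.le_succ i) (ih (i + 1))
    · exact le_trans (Nat.le_succ i) (ih (i + 1))
    · exact le_refl i

theorem pvHoleSum_zero (hb : Nat → Bool) (a : Nat → Char) (t : Nat) (bits : List Nat)
    (h : ∀ k ∈ bits, t ≤ k) : pvHoleSum hb a t bits = 0 := by
  unfold pvHoleSum
  induction bits with
  | nil => simp
  | cons b bs ih =>
    simp only [List.map_cons, List.sum_cons]
    rw [ih (fun k hk => h k (List.mem_cons_of_mem b hk))]
    have hb' : ¬ b < t := Nat.not_lt.mpr (h b List.mem_cons_self)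
    simp [hb']

theorem pvPrefVal_fillRev (hb : Nat → Bool) (a : Nat → Char)
    (hva : ∀ k, hb k = true → pvValid (a k) = true) :
    ∀ (r : List Char) (i : Nat),
      pvPrefVal (pvFillRev hb a r i) i =
        (pvScanZ hb r i).2 + pvHoleSum hb a (pvScanZ hb r i).1 (List.range' i r.length) := by
  intro r
  induction r with
  | nil => intro i; simp [pvFillRev, pvScanZ, pvHoleSum, pvPrefVal]
  | cons c r ih =>
    intro i
    by_cases h1 : hb i
    · have hvalid := hva i h1
      have hlt : i < (pvScanZ hb r (i + 1)).1 :=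
        Nat.lt_of_lt_of_le (Nat.lt_succ_self i) (pvScanZ_fst_ge hb r (i + 1))
      simp only [pvFillRev, pvScanZ, h1, if_true, List.length_cons, List.range'_succ,
        pvPrefVal, hvalid, pvHoleSum, List.map_cons, List.sum_cons, hlt]
      rw [ih (i + 1)]
      unfold pvHoleSum
      ring
    · by_cases h2 : pvValid c = true
      · have hlt : i < (pvScanZ hb r (i + 1)).1 :=
          Nat.lt_of_lt_of_le (Nat.lt_succ_self i) (pvScanZ_fst_ge hb r (i + 1))
        simp only [pvFillRev, pvScanZ, h1, if_false, Bool.false_eq_true, h2, if_true,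
          List.length_cons, List.range'_succ, pvPrefVal, pvHoleSum, List.map_cons, List.sum_cons]
        rw [ih (i + 1)]
        unfold pvHoleSum
        ring
      · have h2' : pvValid c = false := by simpa using h2
        simp only [pvFillRev, pvScanZ, h1, if_false, Bool.false_eq_true, h2', pvPrefVal,
          List.length_cons, List.range'_succ]
        rw [pvHoleSum_zero hb a i]
        · simp
        · intro k hk
          rcases List.mem_cons.mp hk with h | h
          · omega
          · have := List.mem_range'_1.mp h
            omega

theorem pvIntDiffGoA_emod (n : Nat) :
    ∀ (rev : List Char) (i : Nat) (acc : Int),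
      (pvIntDiffGoA n rev i acc).1 % 2 ^ n = (acc + pvPrefVal rev i) % 2 ^ n := by
  intro rev
  induction rev with
  | nil =>
    intro i acc
    have hpos : (0:Int) < 2 ^ n := by positivity
    simp [pvIntDiffGoA, pvPrefVal, PySem.Int.mod_eq_emod_of_pos hpos, Int.emod_emod_of_dvd]
  | cons c r ih =>
    intro i acc
    by_cases hv : pvValid c = true
    · have hc : (['u', 'n', '-', '1', '0'] : List Char).contains c = true := hv
      simp only [pvIntDiffGoA]
      rw [if_neg (not_not_intro hc)]
      rw [ih]
      have hpv : pvPrefVal (c :: r) i = pvDigB c * 2 ^ i + pvPrefVal r (i + 1) := by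
        simp only [pvPrefVal, hv, if_true]
      rw [hpv]
      congr 1
      unfold pvDigB
      ring
    · have hc : ¬ (['u', 'n', '-', '1', '0'] : List Char).contains c = true := hv
      have hv'' : pvValid c = false := by simpa using hv
      simp only [pvIntDiffGoA]
      rw [if_pos hc]
      have hpv : pvPrefVal (c :: r) i = 0 := by
        simp only [pvPrefVal, hv'', Bool.false_eq_true, if_false]
      rw [hpv]
      simp

theorem pvBandMask (x : Int) (m : Nat) : PySem.Int.band x (2 ^ m - 1) = x % 2 ^ m := by
  have h2 : ((2 ^ m : Nat) : Int) = 2 ^ m := by push_cast; ring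
  have hone : (1:Nat) ≤ 2 ^ m := Nat.one_le_two_pow
  by_cases hx : 0 ≤ x
  · rw [PySem.Int.band_of_nonneg hx (by omega)]
    have htn : ((2:Int) ^ m - 1).toNat = 2 ^ m - 1 := by omega
    rw [htn, Nat.and_two_pow_sub_one_eq_mod]
    have hx' : ((x.toNat : Int)) = x := Int.toNat_of_nonneg hx
    push_cast
    rw [hx']
  · have hx' : x < 0 := lt_of_not_ge hx
    have hbnn : (0:Int) ≤ 2 ^ m - 1 := by omega
    unfold PySem.Int.band
    rw [if_neg hx, if_pos hbnn]
    set k := (-x - 1).toNat with hkdef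
    have hk : (k : Int) = -x - 1 := Int.toNat_of_nonneg (by omega)
    have htn : ((2:Int) ^ m - 1).toNat = 2 ^ m - 1 := by omega
    rw [htn, Nat.land_comm, Nat.and_two_pow_sub_one_eq_mod]
    have hklt : k % 2 ^ m < 2 ^ m := Nat.mod_lt _ (by omega)
    have hcast : ((k % 2 ^ m : Nat) : Int) = (k : Int) % 2 ^ m := by push_cast; ring
    have key : x % (2 ^ m : Int) = 2 ^ m - 1 - (k : Int) % 2 ^ m := by
      have hkqr : 2 ^ m * ((k : Int) / 2 ^ m) + (k : Int) % 2 ^ m = (k : Int) :=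
        Int.ediv_add_emod _ _
      have hr0 : (0:Int) ≤ (k : Int) % 2 ^ m := Int.emod_nonneg _ (by positivity)
      have hr1 : (k : Int) % 2 ^ m < 2 ^ m := Int.emod_lt_of_pos _ (by positivity)
      have hxe : x = (2 ^ m - 1 - (k : Int) % 2 ^ m) + 2 ^ m * (-(((k : Int) / 2 ^ m) + 1)) := by
        have hxk : x = -((k : Int) + 1) := by omega
        rw [hxk]
        linear_combination hkqr
      rw [hxe, Int.add_mul_emod_self_left]
      exact Int.emod_eq_of_lt (by omega) (by omega)
    rw [key]
    omega

theorem pvScanGoB_eq (part : List Char) (hbs : PySem.Set Nat) :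
    ∀ (k i : Nat) (base : Int), i + k = part.length →
      pvScanGoB part part.length hbs (List.range' i k) base =
        ((pvScanZ (fun j => hbs.contains j) (part.reverse.drop i) i).1,
         base + (pvScanZ (fun j => hbs.contains j) (part.reverse.drop i) i).2) := by
  intro k
  induction k with
  | zero =>
    intro i base hik
    have hdrop : part.reverse.drop i = [] := by
      apply List.drop_eq_nil_of_le; simp; omega
    simp [pvScanGoB, hdrop, pvScanZ, ← hik]
  | succ k ih =>
    intro i base hik
    have hi : i < part.length := by omega
    have hirev : i < part.reverse.length := by simpa using hi
    have hdrop : part.reverse.drop i = part.reverse[i] :: part.reverse.drop (i + 1) :=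
      List.drop_eq_getElem_cons hirev
    have hrevi : part.reverse[i] = part[part.length - 1 - i]'(by omega) := by
      rw [List.getElem_reverse]
    have hgetD : part.getD (part.length - 1 - i) ' ' = part[part.length - 1 - i]'(by omega) :=
      List.getD_eq_getElem part ' ' (by omega)
    rw [List.range'_succ, hdrop]
    simp only [pvScanGoB, pvScanZ]
    rw [hgetD, hrevi]
    set c := part[part.length - 1 - i]'(by omega) with hc
    by_cases h1 : hbs.contains i = true
    · rw [if_pos h1, if_pos h1]
      exact ih (i + 1) base (by omega)
    · rw [if_neg h1, if_neg h1]
      by_cases hu : c = 'u'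
      · have hval : pvValid c = true := by rw [pvValid_eq, hu]; rfl
        have hd : pvDigB c = 1 := by rw [pvDigB, if_pos hu]
        rw [if_pos hu, if_pos hval, ih (i + 1) (base + 2 ^ i) (by omega), hd]
        simp only [Prod.mk.injEq, true_and]
        ring
      · by_cases hn : c = 'n'
        · have hval : pvValid c = true := by rw [pvValid_eq, hn]; rfl
          have hd : pvDigB c = -1 := by rw [pvDigB, if_neg hu, if_pos hn]
          rw [if_neg hu, if_pos hn, if_pos hval, ih (i + 1) (base - 2 ^ i) (by omega), hd]
          simp only [Prod.mk.injEq, true_and]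
          ring
        · by_cases hrest : c = '-' ∨ c = '0' ∨ c = '1'
          · have hval : pvValid c = true := by
              rw [pvValid_eq]
              rcases hrest with h | h | h <;> rw [h] <;> rfl
            have hd : pvDigB c = 0 := by rw [pvDigB, if_neg hu, if_neg hn]
            rw [if_neg hu, if_neg hn, if_neg (not_not_intro hrest), if_pos hval,
              ih (i + 1) base (by omega), hd]
            simp only [Prod.mk.injEq, true_and]
            ring
          · have hval : ¬ pvValid c = true := by
              rw [pvValid_eq]
              push_neg at hrest
              obtain ⟨h3, h4, h5⟩ := hrest
              simp [hu, hn, h3, h4, h5]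
            rw [if_neg hu, if_neg hn, if_pos hrest, if_neg hval]
            simp

theorem pvFillRev_length (hb : Nat → Bool) (a : Nat → Char) :
    ∀ (r : List Char) (i : Nat), (pvFillRev hb a r i).length = r.length := by
  intro r
  induction r with
  | nil => intro i; rfl
  | cons c r ih => intro i; simp [pvFillRev, ih]

theorem pvFillRev_getElem (hb : Nat → Bool) (a : Nat → Char) :
    ∀ (r : List Char) (i k : Nat) (hk : k < r.length),
      (pvFillRev hb a r i)[k]'(by rw [pvFillRev_length]; exact hk) =
        if hb (i + k) then a (i + k) else r[k] := by
  intro r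
  induction r with
  | nil => intro i k hk; simp at hk
  | cons c r ih =>
    intro i k hk
    cases k with
    | zero => simp [pvFillRev]
    | succ k =>
      have hk' : k < r.length := by simpa using hk
      have harg : i + 1 + k = i + (k + 1) := by omega
      have := ih (i + 1) k hk'
      rw [harg] at this
      simpa [pvFillRev] using this

-- ---------- proof-side subject-level helpers ----------

def pvHolesP (sub : List Char) : List Nat :=
  (List.range sub.length).filter (fun j => (pvTableA (sub.getD j ' ')).isSome)

def pvCands (sub : List Char) (j : Nat) : List Char := (pvTableA (sub.getD j ' ')).getD []

def pvOkay (sub : List Char) (vs : List Char) : Prop :=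
  List.Forall₂ (fun v j => v ∈ pvCands sub j) vs (pvHolesP sub)

def pvASub (sub : List Char) (vs : List Char) (j : Nat) : Char :=
  (((pvHolesP sub).zip vs).lookup j).getD (sub.getD j ' ')

def pvFilled (sub : List Char) (vs : List Char) : List Char :=
  ((pvHolesP sub).zip vs).foldl (fun acc p => acc.set p.1 p.2) sub

theorem pvHolesP_mem (sub : List Char) (j : Nat) :
    j ∈ pvHolesP sub ↔ j < sub.length ∧ (pvTableA (sub.getD j ' ')).isSome = true := by
  simp [pvHolesP, List.mem_filter, List.mem_range]

theorem pvHolesP_nodup (sub : List Char) : (pvHolesP sub).Nodup :=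
  (List.nodup_range).filter _

theorem pvHolesP_lt (sub : List Char) : ∀ j ∈ pvHolesP sub, j < sub.length := by
  intro j hj; exact ((pvHolesP_mem sub j).mp hj).1

theorem pvFoldSet_length : ∀ (ps : List (Nat × Char)) (acc : List Char),
    (ps.foldl (fun a p => a.set p.1 p.2) acc).length = acc.length := by
  intro ps
  induction ps with
  | nil => intro acc; rfl
  | cons p ps ih => intro acc; simp [ih]

theorem pvFoldSet_getElem?_not_mem : ∀ (ps : List (Nat × Char)) (acc : List Char) (j : Nat),
    (∀ p ∈ ps, p.1 ≠ j) →
    (ps.foldl (fun a p => a.set p.1 p.2) acc)[j]? = acc[j]? := by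
  intro ps
  induction ps with
  | nil => intro acc j h; rfl
  | cons p ps ih =>
    intro acc j h
    simp only [List.foldl_cons]
    rw [ih _ j (fun q hq => h q (List.mem_cons_of_mem p hq))]
    rw [List.getElem?_set_ne (h p List.mem_cons_self)]

theorem pvFoldSet_getElem?_mem : ∀ (ps : List (Nat × Char)) (acc : List Char) (j : Nat) (v : Char),
    (ps.map Prod.fst).Nodup → (j, v) ∈ ps → j < acc.length →
    (ps.foldl (fun a p => a.set p.1 p.2) acc)[j]? = some v := by
  intro ps
  induction ps with
  | nil => intro acc j v _ h _; simp at h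
  | cons p ps ih =>
    intro acc j v hnd hmem hlt
    simp only [List.map_cons, List.nodup_cons] at hnd
    simp only [List.foldl_cons]
    rcases List.mem_cons.mp hmem with heq | hmem'
    · have hp : p = (j, v) := heq.symm
      subst hp
      rw [pvFoldSet_getElem?_not_mem ps _ j (by
        intro q hq hqj
        exact hnd.1 (List.mem_map.mpr ⟨q, hq, hqj⟩))]
      simp [List.getElem?_set_self, hlt]
    · exact ih _ j v hnd.2 hmem' (by simpa using hlt)

theorem pvFilled_length (sub : List Char) (vs : List Char) :
    (pvFilled sub vs).length = sub.length := pvFoldSet_length _ _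

theorem pvLookup_of_mem : ∀ (ps : List (Nat × Char)) (j : Nat) (v : Char),
    (ps.map Prod.fst).Nodup → (j, v) ∈ ps → ps.lookup j = some v := by
  intro ps
  induction ps with
  | nil => intro j v _ h; simp at h
  | cons p ps ih =>
    intro j v hnd hmem
    simp only [List.map_cons, List.nodup_cons] at hnd
    rcases List.mem_cons.mp hmem with heq | hmem'
    · have hp : p = (j, v) := heq.symm
      subst hp
      simp [List.lookup]
    · have hne : p.1 ≠ j := by
        intro h
        exact hnd.1 (h ▸ List.mem_map_of_mem hmem')
      cases p with
      | mk a b =>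
        have hb : (j == a) = false := beq_false_of_ne (Ne.symm hne)
        simp only [List.lookup, hb]
        exact ih j v hnd.2 hmem'

theorem pvLookup_not_mem : ∀ (ps : List (Nat × Char)) (j : Nat),
    (∀ p ∈ ps, p.1 ≠ j) → ps.lookup j = none := by
  intro ps
  induction ps with
  | nil => intro j _; rfl
  | cons p ps ih =>
    intro j h
    have hne : p.1 ≠ j := h p List.mem_cons_self
    cases p with
    | mk a b =>
      have hb : (j == a) = false := beq_false_of_ne (Ne.symm hne)
      simp only [List.lookup, hb]
      exact ih j (fun q hq => h q (List.mem_cons_of_mem _ hq))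

theorem pvZip_fst_nodup (sub : List Char) (vs : List Char)
    (hlen : vs.length = (pvHolesP sub).length) :
    (((pvHolesP sub).zip vs).map Prod.fst).Nodup := by
  rw [List.map_fst_zip (le_of_eq hlen.symm)]
  exact pvHolesP_nodup sub

theorem pvASub_of_pair (sub : List Char) (vs : List Char)
    (hlen : vs.length = (pvHolesP sub).length) (j : Nat) (v : Char)
    (h : (j, v) ∈ (pvHolesP sub).zip vs) : pvASub sub vs j = v := by
  unfold pvASub
  rw [pvLookup_of_mem _ j v (pvZip_fst_nodup sub vs hlen) h]
  rfl

theorem pvASub_not_hole (sub : List Char) (vs : List Char) (j : Nat)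
    (h : j ∉ pvHolesP sub) : pvASub sub vs j = sub.getD j ' ' := by
  unfold pvASub
  have h' : ((pvHolesP sub).zip vs).lookup j = none :=
    pvLookup_not_mem _ _ (fun p hp hpj => h (hpj ▸ (List.of_mem_zip hp).1))
  rw [h']
  rfl

theorem pvZip_pair_exists (sub : List Char) (vs : List Char)
    (hlen : vs.length = (pvHolesP sub).length) (j : Nat) (hj : j ∈ pvHolesP sub) :
    ∃ v, (j, v) ∈ (pvHolesP sub).zip vs := by
  obtain ⟨k, hk, hkj⟩ := List.getElem_of_mem hj
  have hkv : k < vs.length := by omega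
  have hkz : k < ((pvHolesP sub).zip vs).length := by
    simp [List.length_zip]; omega
  refine ⟨vs[k], ?_⟩
  have hz : ((pvHolesP sub).zip vs)[k]'hkz = (j, vs[k]) := by
    rw [List.getElem_zip, hkj]
  exact hz ▸ List.getElem_mem hkz

theorem pvFilled_getElem? (sub : List Char) (vs : List Char)
    (hlen : vs.length = (pvHolesP sub).length) (j : Nat) (hj : j < sub.length) :
    (pvFilled sub vs)[j]? = some (pvASub sub vs j) := by
  by_cases hmem : ∃ v, (j, v) ∈ (pvHolesP sub).zip vs
  · obtain ⟨v, hv⟩ := hmem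
    rw [pvFilled, pvFoldSet_getElem?_mem _ _ j v (pvZip_fst_nodup sub vs hlen) hv hj]
    rw [pvASub_of_pair sub vs hlen j v hv]
  · have hjn : j ∉ pvHolesP sub := fun hjh => hmem (pvZip_pair_exists sub vs hlen j hjh)
    rw [pvFilled, pvFoldSet_getElem?_not_mem _ _ j (by
      intro p hp hpj
      obtain ⟨a, b⟩ := p
      simp only at hpj
      subst hpj
      exact hmem ⟨b, hp⟩)]
    rw [pvASub_not_hole sub vs j hjn]
    rw [List.getElem?_eq_getElem hj, List.getD_eq_getElem sub ' ' hj]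

theorem pvFilled_getD (sub : List Char) (vs : List Char)
    (hlen : vs.length = (pvHolesP sub).length) (j : Nat) (hj : j < sub.length) :
    (pvFilled sub vs).getD j ' ' = pvASub sub vs j := by
  rw [List.getD_eq_getElem?_getD, pvFilled_getElem? sub vs hlen j hj]
  rfl

theorem pvTableA_valid (c : Char) (l : List Char) (h : pvTableA c = some l) :
    ∀ v ∈ l, pvValid v = true := by
  unfold pvTableA at h
  split_ifs at h <;>
    first
      | (simp only [Option.some.injEq] at h; subst h; intro v hv; fin_cases hv <;> rfl)
      | simp at h

theorem pvCands_valid (sub : List Char) (j : Nat)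
    (hj : (pvTableA (sub.getD j ' ')).isSome = true) :
    ∀ v ∈ pvCands sub j, pvValid v = true := by
  unfold pvCands
  obtain ⟨l, hl⟩ := Option.isSome_iff_exists.mp hj
  rw [hl]
  exact pvTableA_valid _ l hl

theorem pvForall₂_getElem {α β : Type} {R : α → β → Prop} :
    ∀ (vs : List α) (hs : List β), List.Forall₂ R vs hs →
      ∀ k (h1 : k < vs.length) (h2 : k < hs.length), R (vs[k]) (hs[k]) := by
  intro vs
  induction vs with
  | nil => intro hs h k h1 h2; simp at h1
  | cons v vs ih =>
    intro hs h k h1 h2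
    cases h with
    | cons hR htail =>
      cases k with
      | zero => simpa using hR
      | succ k => exact ih _ htail k (by simpa using h1) (by simpa using h2)

theorem pvForall₂_of_getElem {α β : Type} {R : α → β → Prop} :
    ∀ (vs : List α) (hs : List β), vs.length = hs.length →
      (∀ k (h1 : k < vs.length) (h2 : k < hs.length), R (vs[k]) (hs[k])) →
      List.Forall₂ R vs hs := by
  intro vs
  induction vs with
  | nil =>
    intro hs hlen _
    have : hs = [] := by
      cases hs with
      | nil => rfl
      | cons b bs => simp at hlen
    subst this
    exact List.Forall₂.nil
  | cons v vs ih =>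
    intro hs hlen hR
    cases hs with
    | nil => simp at hlen
    | cons b bs =>
      refine List.Forall₂.cons (hR 0 (by simp) (by simp)) ?_
      exact ih bs (by simpa using hlen) (fun k h1 h2 =>
        hR (k + 1) (by simpa using h1) (by simpa using h2))

theorem pvFillA_eq (sub : List Char) :
    ∀ (hs : List Nat) (vs : List Char) (acc : List Char), vs.length = hs.length →
      pvFillA sub ((hs.map (fun (j : Nat) => (j : Int))).zip vs) acc =
        (if List.Forall₂ (fun v j => v ∈ pvCands sub j) vs hs then
          some ((hs.zip vs).foldl (fun a p => a.set p.1 p.2) acc)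
        else none) := by
  intro hs
  induction hs with
  | nil =>
    intro vs acc hlen
    have : vs = [] := List.eq_nil_of_length_eq_zero hlen
    subst this
    simp [pvFillA]
  | cons h hs ih =>
    intro vs acc hlen
    cases vs with
    | nil => simp at hlen
    | cons v vs =>
      simp only [List.map_cons, List.zip_cons_cons, pvFillA]
      rw [PySem.List.pyGetD_natCast]
      have hconf : pvConformsA v (sub.getD h ' ') = true ↔ v ∈ pvCands sub h := by
        simp [pvConformsA, pvCands, List.contains_eq_mem]
      by_cases hv : v ∈ pvCands sub h
      · rw [if_neg (not_not_intro (hconf.mpr hv))]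
        rw [PySem.List.pySetD_natCast]
        rw [ih vs _ (by simpa using hlen)]
        by_cases hF : List.Forall₂ (fun v j => v ∈ pvCands sub j) vs hs
        · rw [if_pos hF, if_pos (List.Forall₂.cons (R := fun v j => v ∈ pvCands sub j) hv hF)]
          rfl
        · rw [if_neg hF, if_neg (fun hc => by cases hc with | cons h1 h2 => exact hF h2)]
      · rw [if_pos (by rw [hconf]; exact hv)]
        rw [if_neg (fun hc => by cases hc with | cons h1 h2 => exact hv h1)]

theorem pvProductRepeatA_mem (pool : List Char) :
    ∀ (n : Nat) (vs : List Char),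
      vs ∈ pvProductRepeatA pool n ↔ vs.length = n ∧ ∀ v ∈ vs, v ∈ pool := by
  intro n
  induction n with
  | zero =>
    intro vs
    simp only [pvProductRepeatA, List.mem_singleton]
    constructor
    · rintro rfl; simp
    · intro ⟨hlen, _⟩
      exact List.eq_nil_of_length_eq_zero hlen
  | succ n ih =>
    intro vs
    simp only [pvProductRepeatA, List.mem_flatten, List.mem_map]
    constructor
    · rintro ⟨l', ⟨v, hv, rfl⟩, hm⟩
      obtain ⟨t, ht, rfl⟩ := List.mem_map.mp hm
      obtain ⟨hlen, hall⟩ := (ih t).mp ht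
      refine ⟨by simp [hlen], ?_⟩
      intro w hw
      rcases List.mem_cons.mp hw with rfl | hw
      · exact hv
      · exact hall w hw
    · rintro ⟨hlen, hall⟩
      cases vs with
      | nil => simp at hlen
      | cons v t =>
        refine ⟨(pvProductRepeatA pool n).map (fun rest => v :: rest),
          ⟨v, hall v List.mem_cons_self, rfl⟩, ?_⟩
        exact List.mem_map.mpr ⟨t, (ih t).mpr ⟨by simpa using hlen,
          fun w hw => hall w (List.mem_cons_of_mem v hw)⟩, rfl⟩

theorem pvCands_subset_possible (sub : List Char) (j : Nat) (hj : j ∈ pvHolesP sub) :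
    ∀ v ∈ pvCands sub j,
      v ∈ PySem.Set.ofList ((sub.map (fun x =>
        match pvTableA x with | some l => l | none => [x])).flatten) := by
  intro v hv
  rw [PySem.Set.mem_ofList, List.mem_flatten]
  obtain ⟨hjlt, hsome⟩ := (pvHolesP_mem sub j).mp hj
  refine ⟨pvCands sub j, ?_, hv⟩
  rw [List.mem_map]
  have hg : sub.getD j ' ' = sub[j] := List.getD_eq_getElem sub ' ' hjlt
  refine ⟨sub.getD j ' ', by rw [hg]; exact List.getElem_mem hjlt, ?_⟩
  obtain ⟨l, hl⟩ := Option.isSome_iff_exists.mp hsome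
  simp only [pvCands, hl, Option.getD_some]

theorem pvEnum_holes (f : Char → Bool) :
    ∀ (sub : List Char) (s : Int),
      ((PySem.List.enumerate sub s).filter (fun p => f p.2)).map Prod.fst =
        ((List.range sub.length).filter (fun j => f (sub.getD j ' '))).map
          (fun (j : Nat) => s + (j : Int)) := by
  intro sub
  induction sub with
  | nil => intro s; simp [PySem.List.enumerate]
  | cons c sub ih =>
    intro s
    rw [PySem.List.enumerate_cons]
    simp only [List.length_cons]
    rw [List.range_succ_eq_map]
    rw [List.filter_cons, List.filter_cons]
    simp only [List.getD_cons_zero]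
    rw [List.filter_map]
    have hfil : (List.range sub.length).filter ((fun j => f ((c :: sub).getD j ' ')) ∘ Nat.succ)
        = (List.range sub.length).filter (fun j => f (sub.getD j ' ')) := by
      apply List.filter_congr
      intro a _
      simp [Function.comp, List.getD_cons_succ]
    rw [hfil]
    by_cases hc : f c = true
    · simp only [hc, if_true, List.map_cons]
      rw [ih (s + 1)]
      congr 1
      · simp
      · rw [List.map_map]
        apply List.map_congr_left
        intro j _
        simp only [Function.comp_apply]
        push_cast
        ring
    · have hc' : f c = false := by simpa using hc
      simp only [hc', Bool.false_eq_true, if_false]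
      rw [ih (s + 1), List.map_map]
      apply List.map_congr_left
      intro j _
      simp only [Function.comp_apply]
      push_cast
      ring

theorem pvHolesA_eq (sub : List Char) :
    ((PySem.List.enumerate sub 0).filter (fun p => (pvTableA p.2).isSome)).map Prod.fst =
      (pvHolesP sub).map (fun (j : Nat) => (j : Int)) := by
  rw [pvEnum_holes (fun c => (pvTableA c).isSome) sub 0]
  unfold pvHolesP
  apply List.map_congr_left
  intro j _
  ring

-- ---------- proof-side value computation (B's linear form vs A's _int_diff re-scan) ----------

def pvMn (sub : List Char) : Nat := sub.length / 2

def pvHB1 (sub : List Char) : PySem.Set Nat :=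
  PySem.Set.ofList (((pvHolesP sub).filter (fun j => j < pvMn sub)).map (fun j => pvMn sub - 1 - j))

def pvHB2 (sub : List Char) : PySem.Set Nat :=
  PySem.Set.ofList (((pvHolesP sub).filter (fun j => ¬ j < pvMn sub)).map
    (fun j => sub.length - 1 - j))

def pvS1 (sub : List Char) : Nat × Int := pvScanPartB (sub.take (pvMn sub)) (pvHB1 sub)

def pvS2 (sub : List Char) : Nat × Int := pvScanPartB (sub.drop (pvMn sub)) (pvHB2 sub)

def pvWeightF (sub : List Char) (j : Nat) : Int :=
  if j < pvMn sub then (if pvMn sub - 1 - j < (pvS1 sub).1 then 2 ^ (pvMn sub - 1 - j) else 0)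
  else (if sub.length - 1 - j < (pvS2 sub).1 then 2 ^ (sub.length - 1 - j) else 0)

def pvCB (sub : List Char) (vs : List Char) : Int :=
  (vs.zip ((pvHolesP sub).map (pvWeightF sub))).foldl
    (fun c vw => if vw.1 = 'u' then c + vw.2 else if vw.1 = 'n' then c - vw.2 else c)
    ((pvS1 sub).2 + (pvS2 sub).2)

def pvCA (sub : List Char) (vs : List Char) : Int :=
  (pvIntDiffA ((pvFilled sub vs).take (pvMn sub))).1 +
  (pvIntDiffA ((pvFilled sub vs).drop (pvMn sub))).1

theorem pvHolesP_sorted (sub : List Char) : (pvHolesP sub).Pairwise (· < ·) :=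
  List.Pairwise.filter _ (List.pairwise_lt_range)

theorem pvSetContains_iff (s : PySem.Set Nat) (x : Nat) : (s.contains x = true) ↔ x ∈ s := by
  simp [PySem.Set.contains, List.contains_eq_mem]

theorem pvA_mem_cands (sub : List Char) (vs : List Char) (hok : pvOkay sub vs) (j : Nat)
    (hj : j ∈ pvHolesP sub) : pvASub sub vs j ∈ pvCands sub j := by
  have hlen := List.Forall₂.length_eq hok
  obtain ⟨k, hk, hkj⟩ := List.getElem_of_mem hj
  have hkv : k < vs.length := by omega
  have hkz : k < ((pvHolesP sub).zip vs).length := by simp [List.length_zip]; omega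
  have hz : ((pvHolesP sub).zip vs)[k]'hkz = (j, vs[k]) := by rw [List.getElem_zip, hkj]
  rw [pvASub_of_pair sub vs hlen j (vs[k]) (hz ▸ List.getElem_mem hkz)]
  have hr := pvForall₂_getElem vs (pvHolesP sub) hok k hkv hk
  rw [hkj] at hr
  exact hr

theorem pvA_valid (sub : List Char) (vs : List Char) (hok : pvOkay sub vs) (j : Nat)
    (hj : j ∈ pvHolesP sub) : pvValid (pvASub sub vs j) = true := by
  obtain ⟨_, hsome⟩ := (pvHolesP_mem sub j).mp hj
  exact pvCands_valid sub j hsome _ (pvA_mem_cands sub vs hok j hj)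

theorem pvHB1_mem (sub : List Char) (k : Nat) (hk : k < pvMn sub) :
    ((pvHB1 sub).contains k = true) ↔ (pvMn sub - 1 - k) ∈ pvHolesP sub := by
  unfold pvHB1
  rw [pvSetContains_iff, PySem.Set.mem_ofList]
  constructor
  · intro hmem
    obtain ⟨j, hj, hjk⟩ := List.mem_map.mp hmem
    obtain ⟨hjh, hjm⟩ := List.mem_filter.mp hj
    have hjm' : j < pvMn sub := by simpa using hjm
    have he : pvMn sub - 1 - k = j := by omega
    rw [he]
    exact hjh
  · intro hmem
    refine List.mem_map.mpr ⟨pvMn sub - 1 - k,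
      List.mem_filter.mpr ⟨hmem, by simp; omega⟩, by omega⟩

theorem pvHB2_mem (sub : List Char) (k : Nat) (hk : k < sub.length - pvMn sub) :
    ((pvHB2 sub).contains k = true) ↔ (sub.length - 1 - k) ∈ pvHolesP sub := by
  unfold pvHB2
  rw [pvSetContains_iff, PySem.Set.mem_ofList]
  have hmle : pvMn sub ≤ sub.length - pvMn sub := by unfold pvMn; omega
  constructor
  · intro hmem
    obtain ⟨j, hj, hjk⟩ := List.mem_map.mp hmem
    obtain ⟨hjh, hjm⟩ := List.mem_filter.mp hj
    have hjm' : ¬ j < pvMn sub := by simpa using hjm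
    have hjL : j < sub.length := pvHolesP_lt sub j hjh
    have he : sub.length - 1 - k = j := by omega
    rw [he]
    exact hjh
  · intro hmem
    have hjL : sub.length - 1 - k < sub.length := pvHolesP_lt sub _ hmem
    refine List.mem_map.mpr ⟨sub.length - 1 - k,
      List.mem_filter.mpr ⟨hmem, by simp; omega⟩, by omega⟩

theorem pvHB1_bound (sub : List Char) (k : Nat) (h : (pvHB1 sub).contains k = true) :
    k < pvMn sub := by
  rw [pvSetContains_iff] at h
  unfold pvHB1 at h
  rw [PySem.Set.mem_ofList] at h
  obtain ⟨j, hj, hjk⟩ := List.mem_map.mp h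
  have : j < pvMn sub := by simpa using (List.mem_filter.mp hj).2
  omega

theorem pvHB2_bound (sub : List Char) (k : Nat) (h : (pvHB2 sub).contains k = true) :
    k < sub.length - pvMn sub := by
  rw [pvSetContains_iff] at h
  unfold pvHB2 at h
  rw [PySem.Set.mem_ofList] at h
  obtain ⟨j, hj, hjk⟩ := List.mem_map.mp h
  have h1 : ¬ j < pvMn sub := by simpa using (List.mem_filter.mp hj).2
  have h2 : j < sub.length := pvHolesP_lt sub j (List.mem_filter.mp hj).1
  omega

theorem pvGet?_take {α : Type} : ∀ (l : List α) (n i : Nat), i < n → (l.take n)[i]? = l[i]? := by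
  intro l
  induction l with
  | nil => intro n i _; simp
  | cons a l ih =>
    intro n i h
    cases n with
    | zero => omega
    | succ n =>
      cases i with
      | zero => simp
      | succ i => simpa using ih n i (by omega)

theorem pvGet?_drop {α : Type} : ∀ (l : List α) (n i : Nat), (l.drop n)[i]? = l[n + i]? := by
  intro l
  induction l with
  | nil => intro n i; simp
  | cons a l ih =>
    intro n i
    cases n with
    | zero => simp
    | succ n => simpa [Nat.succ_add] using ih n i

theorem pvGet?_reverse {α : Type} (l : List α) (i : Nat) (h : i < l.length) :
    l.reverse[i]? = l[l.length - 1 - i]? := by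
  rw [List.getElem?_eq_getElem (by simpa using h), List.getElem?_eq_getElem (by omega)]
  rw [List.getElem_reverse]

theorem pvFillRev_getElem? (hb : Nat → Bool) (a : Nat → Char) (r : List Char) (i k : Nat)
    (hk : k < r.length) :
    (pvFillRev hb a r i)[k]? = some (if hb (i + k) then a (i + k) else r[k]) := by
  rw [List.getElem?_eq_getElem (by rw [pvFillRev_length]; exact hk)]
  rw [pvFillRev_getElem hb a r i k hk]

theorem pvPart1_fill (sub : List Char) (vs : List Char) (hok : pvOkay sub vs) :
    ((pvFilled sub vs).take (pvMn sub)).reverse =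
      pvFillRev (fun k => (pvHB1 sub).contains k)
        (fun k => pvASub sub vs (pvMn sub - 1 - k)) ((sub.take (pvMn sub)).reverse) 0 := by
  have hlen := List.Forall₂.length_eq hok
  have hm : pvMn sub ≤ sub.length := Nat.div_le_self _ _
  have hfl : (pvFilled sub vs).length = sub.length := pvFilled_length sub vs
  have hL1 : ((pvFilled sub vs).take (pvMn sub)).length = pvMn sub := by
    simp [hfl, Nat.min_eq_left hm]
  have hR0 : (sub.take (pvMn sub)).length = pvMn sub := by
    simp [Nat.min_eq_left hm]
  apply List.ext_getElem?
  intro i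
  by_cases hi : i < pvMn sub
  · have hj : pvMn sub - 1 - i < sub.length := by omega
    have hjm : pvMn sub - 1 - i < pvMn sub := by omega
    rw [pvGet?_reverse _ i (by rw [hL1]; exact hi)]
    rw [hL1]
    rw [pvGet?_take _ _ _ (by omega : pvMn sub - 1 - i < pvMn sub)]
    rw [pvFilled_getElem? sub vs hlen _ hj]
    rw [pvFillRev_getElem? _ _ _ _ i (by rw [List.length_reverse, hR0]; exact hi)]
    simp only [Nat.zero_add]
    by_cases hb : (pvHB1 sub).contains i = true
    · rw [if_pos hb]
    · rw [if_neg hb]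
      have hnh : pvMn sub - 1 - i ∉ pvHolesP sub := fun hmem => hb ((pvHB1_mem sub i hi).mpr hmem)
      rw [pvASub_not_hole sub vs _ hnh]
      congr 1
      have hb1 : i < (sub.take (pvMn sub)).reverse.length := by
        rw [List.length_reverse, hR0]; exact hi
      have := pvGet?_reverse (sub.take (pvMn sub)) i (by rw [hR0]; exact hi)
      rw [hR0] at this
      rw [pvGet?_take _ _ _ (by omega : pvMn sub - 1 - i < pvMn sub)] at this
      rw [List.getElem?_eq_getElem hb1, List.getElem?_eq_getElem hj] at this
      have hv := Option.some.inj this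
      rw [hv]
      exact (List.getD_eq_getElem sub ' ' hj)
  · rw [List.getElem?_eq_none (by rw [List.length_reverse, hL1]; omega)]
    rw [List.getElem?_eq_none (by rw [pvFillRev_length, List.length_reverse, hR0]; omega)]

theorem pvPart2_fill (sub : List Char) (vs : List Char) (hok : pvOkay sub vs) :
    ((pvFilled sub vs).drop (pvMn sub)).reverse =
      pvFillRev (fun k => (pvHB2 sub).contains k)
        (fun k => pvASub sub vs (sub.length - 1 - k)) ((sub.drop (pvMn sub)).reverse) 0 := by
  have hlen := List.Forall₂.length_eq hok
  have hm : pvMn sub ≤ sub.length := Nat.div_le_self _ _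
  have hfl : (pvFilled sub vs).length = sub.length := pvFilled_length sub vs
  have hL1 : ((pvFilled sub vs).drop (pvMn sub)).length = sub.length - pvMn sub := by
    simp [hfl]
  have hR0 : (sub.drop (pvMn sub)).length = sub.length - pvMn sub := by simp
  apply List.ext_getElem?
  intro i
  by_cases hi : i < sub.length - pvMn sub
  · have hj : sub.length - 1 - i < sub.length := by omega
    have hidx : pvMn sub + (sub.length - pvMn sub - 1 - i) = sub.length - 1 - i := by omega
    rw [pvGet?_reverse _ i (by rw [hL1]; exact hi)]
    rw [hL1]
    rw [pvGet?_drop]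
    rw [hidx]
    rw [pvFilled_getElem? sub vs hlen _ hj]
    rw [pvFillRev_getElem? _ _ _ _ i (by rw [List.length_reverse, hR0]; exact hi)]
    simp only [Nat.zero_add]
    by_cases hb : (pvHB2 sub).contains i = true
    · rw [if_pos hb]
    · rw [if_neg hb]
      have hnh : sub.length - 1 - i ∉ pvHolesP sub := fun hmem => hb ((pvHB2_mem sub i hi).mpr hmem)
      rw [pvASub_not_hole sub vs _ hnh]
      congr 1
      have hb1 : i < (sub.drop (pvMn sub)).reverse.length := by
        rw [List.length_reverse, hR0]; exact hi
      have := pvGet?_reverse (sub.drop (pvMn sub)) i (by rw [hR0]; exact hi)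
      rw [hR0] at this
      rw [pvGet?_drop] at this
      rw [hidx] at this
      rw [List.getElem?_eq_getElem hb1, List.getElem?_eq_getElem hj] at this
      have hv := Option.some.inj this
      rw [hv]
      exact (List.getD_eq_getElem sub ' ' hj)
  · rw [List.getElem?_eq_none (by rw [List.length_reverse, hL1]; omega)]
    rw [List.getElem?_eq_none (by rw [pvFillRev_length, List.length_reverse, hR0]; omega)]

theorem pvS1_eq (sub : List Char) :
    pvS1 sub = pvScanZ (fun j => (pvHB1 sub).contains j) ((sub.take (pvMn sub)).reverse) 0 := by
  unfold pvS1 pvScanPartB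
  rw [List.range_eq_range']
  rw [pvScanGoB_eq (sub.take (pvMn sub)) (pvHB1 sub) ((sub.take (pvMn sub)).length) 0 0
    (by omega)]
  simp

theorem pvS2_eq (sub : List Char) :
    pvS2 sub = pvScanZ (fun j => (pvHB2 sub).contains j) ((sub.drop (pvMn sub)).reverse) 0 := by
  unfold pvS2 pvScanPartB
  rw [List.range_eq_range']
  rw [pvScanGoB_eq (sub.drop (pvMn sub)) (pvHB2 sub) ((sub.drop (pvMn sub)).length) 0 0
    (by omega)]
  simp

theorem pvPref1 (sub : List Char) (vs : List Char) (hok : pvOkay sub vs) :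
    pvPrefVal (((pvFilled sub vs).take (pvMn sub)).reverse) 0 =
      (pvS1 sub).2 + pvHoleSum (fun k => (pvHB1 sub).contains k)
        (fun k => pvASub sub vs (pvMn sub - 1 - k)) (pvS1 sub).1
        (List.range' 0 (pvMn sub)) := by
  have hm : pvMn sub ≤ sub.length := Nat.div_le_self _ _
  have hR0 : ((sub.take (pvMn sub)).reverse).length = pvMn sub := by
    simp [Nat.min_eq_left hm]
  rw [pvPart1_fill sub vs hok]
  rw [pvPrefVal_fillRev _ _ (by
    intro k hk
    have hkm := pvHB1_bound sub k hk
    exact pvA_valid sub vs hok _ ((pvHB1_mem sub k hkm).mp hk))]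
  rw [pvS1_eq, hR0]

theorem pvPref2 (sub : List Char) (vs : List Char) (hok : pvOkay sub vs) :
    pvPrefVal (((pvFilled sub vs).drop (pvMn sub)).reverse) 0 =
      (pvS2 sub).2 + pvHoleSum (fun k => (pvHB2 sub).contains k)
        (fun k => pvASub sub vs (sub.length - 1 - k)) (pvS2 sub).1
        (List.range' 0 (sub.length - pvMn sub)) := by
  have hR0 : ((sub.drop (pvMn sub)).reverse).length = sub.length - pvMn sub := by simp
  rw [pvPart2_fill sub vs hok]
  rw [pvPrefVal_fillRev _ _ (by
    intro k hk
    have hkm := pvHB2_bound sub k hk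
    exact pvA_valid sub vs hok _ ((pvHB2_mem sub k hkm).mp hk))]
  rw [pvS2_eq, hR0]

theorem pvFoldDigit : ∀ (l : List (Char × Int)) (c0 : Int),
    l.foldl (fun c vw => if vw.1 = 'u' then c + vw.2 else if vw.1 = 'n' then c - vw.2 else c) c0
      = c0 + (l.map (fun vw => pvDigB vw.1 * vw.2)).sum := by
  intro l
  induction l with
  | nil => intro c0; simp
  | cons p l ih =>
    intro c0
    simp only [List.foldl_cons, List.map_cons, List.sum_cons]
    rw [ih]
    unfold pvDigB
    split_ifs <;> ring

theorem pvZipMapEq (f : Char × Nat → Int) (g : Nat → Int) :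
    ∀ (vs : List Char) (hs : List Nat), vs.length = hs.length →
      (∀ p ∈ vs.zip hs, f p = g p.2) → (vs.zip hs).map f = hs.map g := by
  intro vs
  induction vs with
  | nil =>
    intro hs hlen _
    cases hs with
    | nil => rfl
    | cons b bs => simp at hlen
  | cons v vs ih =>
    intro hs hlen hf
    cases hs with
    | nil => simp at hlen
    | cons h hs =>
      simp only [List.zip_cons_cons, List.map_cons]
      congr 1
      · exact hf (v, h) List.mem_cons_self
      · exact ih hs (by simpa using hlen) (fun p hp => hf p (List.mem_cons_of_mem _ hp))

theorem pvMemZipSwap {α β : Type} : ∀ (as : List α) (bs : List β) (p : α × β),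
    p ∈ as.zip bs → (p.2, p.1) ∈ bs.zip as := by
  intro as
  induction as with
  | nil => intro bs p h; simp at h
  | cons a as ih =>
    intro bs p h
    cases bs with
    | nil => simp at h
    | cons b bs =>
      rcases List.mem_cons.mp h with rfl | h'
      · exact List.mem_cons_self
      · exact List.mem_cons_of_mem _ (ih bs p h')

theorem pvFilterSplit (m : Nat) : ∀ (l : List Nat), l.Pairwise (· < ·) →
    l.filter (fun j => j < m) ++ l.filter (fun j => ¬ j < m) = l := by
  intro l
  induction l with
  | nil => intro _; rfl
  | cons a l ih =>
    intro hp
    have hp' := List.pairwise_cons.mp hp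
    by_cases ha : a < m
    · have h1 : (decide (a < m)) = true := by simpa using ha
      have h2 : (decide (¬ a < m)) = false := by simpa using ha
      simp only [List.filter_cons, h1, h2, if_true, Bool.false_eq_true, if_false]
      rw [List.cons_append, ih hp'.2]
    · have h1 : (decide (a < m)) = false := by simpa using ha
      have h2 : (decide (¬ a < m)) = true := by simpa using ha
      have hnil : l.filter (fun j => decide (j < m)) = [] := by
        apply List.filter_eq_nil_iff.mpr
        intro x hx
        have := hp'.1 x hx
        simp
        omega
      have hall : l.filter (fun j => decide (¬ j < m)) = l := by
        apply List.filter_eq_self.mpr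
        intro x hx
        have := hp'.1 x hx
        simp
        omega
      simp only [List.filter_cons, h1, h2, if_true, Bool.false_eq_true, if_false]
      rw [hnil, hall]
      rfl

theorem pvSumIteSingle (G : Nat → Int) (b : Nat) : ∀ (n : Nat), b < n →
    ((List.range n).map (fun k => if k = b then G k else 0)).sum = G b := by
  intro n
  induction n with
  | zero => intro h; omega
  | succ n ih =>
    intro hb
    rw [List.range_succ, List.map_append, List.sum_append]
    by_cases h : b < n
    · rw [ih h]
      have hne : n ≠ b := by omega
      simp [hne]
    · have hbn : b = n := by omega
      subst hbn
      have hz : ((List.range b).map (fun k => if k = b then G k else 0)).sum = 0 := by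
        apply List.sum_eq_zero
        intro x hx
        obtain ⟨k, hk, rfl⟩ := List.mem_map.mp hx
        have hne : k ≠ b := by have := List.mem_range.mp hk; omega
        simp [hne]
      rw [hz]
      simp

theorem pvSumIndicator (G : Nat → Int) : ∀ (bits : List Nat) (n : Nat), bits.Nodup →
    (∀ b ∈ bits, b < n) →
    ((List.range n).map (fun k => if k ∈ bits then G k else 0)).sum = (bits.map G).sum := by
  intro bits
  induction bits with
  | nil => intro n _ _; simp
  | cons b bs ih =>
    intro n hnd hlt
    have hnd' := List.nodup_cons.mp hnd
    have hstep : ((List.range n).map (fun k => if k ∈ b :: bs then G k else 0)).sum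
        = ((List.range n).map (fun k =>
            (if k = b then G k else 0) + (if k ∈ bs then G k else 0))).sum := by
      apply congrArg
      apply List.map_congr_left
      intro k _
      by_cases h1 : k = b
      · subst h1
        simp [hnd'.1]
      · by_cases h2 : k ∈ bs <;> simp [h1, h2]
    rw [hstep, PySem.List.sum_map_add_int]
    rw [pvSumIteSingle G b n (hlt b List.mem_cons_self),
      ih n hnd'.2 (fun x hx => hlt x (List.mem_cons_of_mem _ hx))]
    simp

theorem pvPartSum1 (sub : List Char) (vs : List Char) (hok : pvOkay sub vs) :
    (((pvHolesP sub).filter (fun j => j < pvMn sub)).map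
      (fun j => pvDigB (pvASub sub vs j) * pvWeightF sub j)).sum
    = pvHoleSum (fun k => (pvHB1 sub).contains k)
        (fun k => pvASub sub vs (pvMn sub - 1 - k)) (pvS1 sub).1
        (List.range' 0 (pvMn sub)) := by
  unfold pvHoleSum
  rw [← List.range_eq_range']
  have hcongr : (List.range (pvMn sub)).map (fun k =>
      if (pvHB1 sub).contains k = true then
        pvDigB (pvASub sub vs (pvMn sub - 1 - k)) * (if k < (pvS1 sub).1 then 2 ^ k else 0)
      else 0)
    = (List.range (pvMn sub)).map (fun k =>
      if k ∈ ((pvHolesP sub).filter (fun j => j < pvMn sub)).map (fun j => pvMn sub - 1 - j) then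
        pvDigB (pvASub sub vs (pvMn sub - 1 - k)) * (if k < (pvS1 sub).1 then 2 ^ k else 0)
      else 0) := by
    apply List.map_congr_left
    intro k _
    have : ((pvHB1 sub).contains k = true)
        ↔ k ∈ ((pvHolesP sub).filter (fun j => j < pvMn sub)).map (fun j => pvMn sub - 1 - j) := by
      rw [pvSetContains_iff]
      unfold pvHB1
      rw [PySem.Set.mem_ofList]
    by_cases hb : (pvHB1 sub).contains k = true
    · rw [if_pos hb, if_pos (this.mp hb)]
    · rw [if_neg hb, if_neg (fun hm => hb (this.mpr hm))]
  rw [hcongr]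
  rw [pvSumIndicator _ _ _ ?nodup ?bound]
  case nodup =>
    apply List.Nodup.map_on
    · intro x hx y hy hxy
      have hxm : x < pvMn sub := by simpa using (List.mem_filter.mp hx).2
      have hym : y < pvMn sub := by simpa using (List.mem_filter.mp hy).2
      omega
    · exact List.Nodup.filter _ (pvHolesP_nodup sub)
  case bound =>
    intro b hb
    obtain ⟨j, hj, rfl⟩ := List.mem_map.mp hb
    have hjm : j < pvMn sub := by simpa using (List.mem_filter.mp hj).2
    omega
  rw [List.map_map]
  apply congrArg
  apply List.map_congr_left
  intro j hj
  have hjm : j < pvMn sub := by simpa using (List.mem_filter.mp hj).2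
  simp only [Function.comp_apply]
  have he : pvMn sub - 1 - (pvMn sub - 1 - j) = j := by omega
  rw [he]
  unfold pvWeightF
  rw [if_pos hjm]

theorem pvPartSum2 (sub : List Char) (vs : List Char) (hok : pvOkay sub vs) :
    (((pvHolesP sub).filter (fun j => ¬ j < pvMn sub)).map
      (fun j => pvDigB (pvASub sub vs j) * pvWeightF sub j)).sum
    = pvHoleSum (fun k => (pvHB2 sub).contains k)
        (fun k => pvASub sub vs (sub.length - 1 - k)) (pvS2 sub).1
        (List.range' 0 (sub.length - pvMn sub)) := by
  unfold pvHoleSum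
  rw [← List.range_eq_range']
  have hcongr : (List.range (sub.length - pvMn sub)).map (fun k =>
      if (pvHB2 sub).contains k = true then
        pvDigB (pvASub sub vs (sub.length - 1 - k)) * (if k < (pvS2 sub).1 then 2 ^ k else 0)
      else 0)
    = (List.range (sub.length - pvMn sub)).map (fun k =>
      if k ∈ ((pvHolesP sub).filter (fun j => ¬ j < pvMn sub)).map (fun j => sub.length - 1 - j)
      then
        pvDigB (pvASub sub vs (sub.length - 1 - k)) * (if k < (pvS2 sub).1 then 2 ^ k else 0)
      else 0) := by
    apply List.map_congr_left
    intro k _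
    have : ((pvHB2 sub).contains k = true)
        ↔ k ∈ ((pvHolesP sub).filter (fun j => ¬ j < pvMn sub)).map
            (fun j => sub.length - 1 - j) := by
      rw [pvSetContains_iff]
      unfold pvHB2
      rw [PySem.Set.mem_ofList]
    by_cases hb : (pvHB2 sub).contains k = true
    · rw [if_pos hb, if_pos (this.mp hb)]
    · rw [if_neg hb, if_neg (fun hm => hb (this.mpr hm))]
  rw [hcongr]
  rw [pvSumIndicator _ _ _ ?nodup ?bound]
  case nodup =>
    apply List.Nodup.map_on
    · intro x hx y hy hxy
      have hxm : ¬ x < pvMn sub := by simpa using (List.mem_filter.mp hx).2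
      have hym : ¬ y < pvMn sub := by simpa using (List.mem_filter.mp hy).2
      have hxL : x < sub.length := pvHolesP_lt sub x (List.mem_filter.mp hx).1
      have hyL : y < sub.length := pvHolesP_lt sub y (List.mem_filter.mp hy).1
      omega
    · exact List.Nodup.filter _ (pvHolesP_nodup sub)
  case bound =>
    intro b hb
    obtain ⟨j, hj, rfl⟩ := List.mem_map.mp hb
    have hjm : ¬ j < pvMn sub := by simpa using (List.mem_filter.mp hj).2
    have hjL : j < sub.length := pvHolesP_lt sub j (List.mem_filter.mp hj).1
    omega
  rw [List.map_map]
  apply congrArg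
  apply List.map_congr_left
  intro j hj
  have hjm : ¬ j < pvMn sub := by simpa using (List.mem_filter.mp hj).2
  have hjL : j < sub.length := pvHolesP_lt sub j (List.mem_filter.mp hj).1
  simp only [Function.comp_apply]
  have he : sub.length - 1 - (sub.length - 1 - j) = j := by omega
  rw [he]
  unfold pvWeightF
  rw [if_neg hjm]

theorem pvCB_decomp (sub : List Char) (vs : List Char) (hok : pvOkay sub vs) :
    pvCB sub vs = pvPrefVal (((pvFilled sub vs).take (pvMn sub)).reverse) 0
                + pvPrefVal (((pvFilled sub vs).drop (pvMn sub)).reverse) 0 := by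
  have hlen := List.Forall₂.length_eq hok
  unfold pvCB
  rw [pvFoldDigit]
  rw [List.zip_map_right, List.map_map]
  have hfun : ((fun vw : Char × Int => pvDigB vw.1 * vw.2) ∘ (Prod.map id (pvWeightF sub)))
      = fun p : Char × Nat => pvDigB p.1 * pvWeightF sub p.2 := by
    funext p
    cases p
    rfl
  rw [hfun]
  rw [pvZipMapEq _ (fun j => pvDigB (pvASub sub vs j) * pvWeightF sub j) vs (pvHolesP sub) hlen
    (fun p hp => by
      have hsw := pvMemZipSwap vs (pvHolesP sub) p hp
      show pvDigB p.1 * pvWeightF sub p.2 = pvDigB (pvASub sub vs p.2) * pvWeightF sub p.2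
      rw [pvASub_of_pair sub vs hlen p.2 p.1 hsw])]
  conv_lhs => rw [← pvFilterSplit (pvMn sub) (pvHolesP sub) (pvHolesP_sorted sub)]
  rw [List.map_append, List.sum_append]
  rw [pvPartSum1 sub vs hok, pvPartSum2 sub vs hok]
  rw [pvPref1 sub vs hok, pvPref2 sub vs hok]
  ring

theorem pvValue_eq (sub : List Char) (vs : List Char) (hok : pvOkay sub vs) :
    PySem.Int.band (pvCA sub vs) (2 ^ pvMn sub - 1) =
      PySem.Int.band (pvCB sub vs) (2 ^ pvMn sub - 1) := by
  rw [pvBandMask, pvBandMask]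
  have hm : pvMn sub ≤ sub.length := Nat.div_le_self _ _
  have hm2 : pvMn sub ≤ sub.length - pvMn sub := by unfold pvMn; omega
  have hfl : (pvFilled sub vs).length = sub.length := pvFilled_length sub vs
  have hlen1 : ((pvFilled sub vs).take (pvMn sub)).length = pvMn sub := by
    simp [hfl, Nat.min_eq_left hm]
  have hlen2 : ((pvFilled sub vs).drop (pvMn sub)).length = sub.length - pvMn sub := by
    simp [hfl]
  have h1 : (pvIntDiffA ((pvFilled sub vs).take (pvMn sub))).1 % 2 ^ pvMn sub
      = pvPrefVal (((pvFilled sub vs).take (pvMn sub)).reverse) 0 % 2 ^ pvMn sub := by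
    unfold pvIntDiffA
    rw [hlen1]
    have := pvIntDiffGoA_emod (pvMn sub) (((pvFilled sub vs).take (pvMn sub)).reverse) 0 0
    simpa using this
  have h2 : (pvIntDiffA ((pvFilled sub vs).drop (pvMn sub))).1 % 2 ^ pvMn sub
      = pvPrefVal (((pvFilled sub vs).drop (pvMn sub)).reverse) 0 % 2 ^ pvMn sub := by
    unfold pvIntDiffA
    rw [hlen2]
    have hdvd : ((2:Int) ^ pvMn sub) ∣ 2 ^ (sub.length - pvMn sub) := pow_dvd_pow 2 hm2
    have hgen := pvIntDiffGoA_emod (sub.length - pvMn sub)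
      (((pvFilled sub vs).drop (pvMn sub)).reverse) 0 0
    have e1 := (Int.emod_emod_of_dvd
      ((pvIntDiffGoA (sub.length - pvMn sub) (((pvFilled sub vs).drop (pvMn sub)).reverse) 0 0).1)
      hdvd).symm
    have e2 := Int.emod_emod_of_dvd
      (pvPrefVal (((pvFilled sub vs).drop (pvMn sub)).reverse) 0) hdvd
    rw [e1, hgen]
    simpa using e2
  unfold pvCA
  rw [Int.add_emod, h1, h2, ← Int.add_emod]
  rw [pvCB_decomp sub vs hok]

-- ---------- proof-side columns / matches ----------

def pvPossible (sub : List Char) : PySem.Set Char :=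
  PySem.Set.ofList ((sub.map (fun x =>
    match pvTableA x with | some l => l | none => [x])).flatten)

def pvFm (sub : List Char) (constant : Int) (combo : List Char) : Option (List Char) :=
  match pvFillA sub (((pvHolesP sub).map (fun (j : Nat) => (j : Int))).zip combo) sub with
  | none => none
  | some new_subject =>
    if PySem.Int.band ((pvIntDiffA (new_subject.take (pvMn sub))).1 +
        (pvIntDiffA (new_subject.drop (pvMn sub))).1) (2 ^ pvMn sub - 1) = constant
    then some new_subject else none

def pvMatchesA (sub : List Char) (constant : Int) : List (List Char) :=
  (pvProductRepeatA (pvPossible sub) (pvHolesP sub).length).filterMap (pvFm sub constant)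

theorem pvMatchesA_foldl (sub : List Char) (constant : Int) :
    ∀ (combos : List (List Char)) (acc : List (List Char)),
      combos.foldl (fun acc combo =>
        match pvFillA sub (((pvHolesP sub).map (fun (j : Nat) => (j : Int))).zip combo) sub with
        | none => acc
        | some new_subject =>
          if PySem.Int.band ((pvIntDiffA (new_subject.take (pvMn sub))).1 +
              (pvIntDiffA (new_subject.drop (pvMn sub))).1) (2 ^ pvMn sub - 1) = constant
          then acc ++ [new_subject] else acc) acc
      = acc ++ combos.filterMap (pvFm sub constant) := by
  intro combos
  induction combos with
  | nil => intro acc; simp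
  | cons combo combos ih =>
    intro acc
    simp only [List.foldl_cons, List.filterMap_cons]
    cases hF : pvFillA sub (((pvHolesP sub).map (fun (j : Nat) => (j : Int))).zip combo) sub with
    | none =>
      simp only [hF]
      rw [ih]
      have hFm : pvFm sub constant combo = none := by
        unfold pvFm
        rw [hF]
      rw [hFm]
    | some ns =>
      simp only [hF]
      by_cases hc : PySem.Int.band ((pvIntDiffA (ns.take (pvMn sub))).1 +
          (pvIntDiffA (ns.drop (pvMn sub))).1) (2 ^ pvMn sub - 1) = constant
      · rw [if_pos hc, ih]
        have hFm : pvFm sub constant combo = some ns := by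
          unfold pvFm
          rw [hF]
          exact if_pos hc
        rw [hFm]
        simp
      · rw [if_neg hc, ih]
        have hFm : pvFm sub constant combo = none := by
          unfold pvFm
          rw [hF]
          exact if_neg hc
        rw [hFm]

theorem pvMatchesA_mem (sub : List Char) (constant : Int) (mt : List Char) :
    mt ∈ pvMatchesA sub constant ↔ ∃ vs, pvOkay sub vs ∧
      PySem.Int.band (pvCB sub vs) (2 ^ pvMn sub - 1) = constant ∧ mt = pvFilled sub vs := by
  unfold pvMatchesA
  rw [List.mem_filterMap]
  constructor
  · rintro ⟨combo, hmem, hFm⟩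
    obtain ⟨hlenc, hallc⟩ := (pvProductRepeatA_mem _ _ combo).mp hmem
    unfold pvFm at hFm
    cases hfill : pvFillA sub (((pvHolesP sub).map (fun (j : Nat) => (j : Int))).zip combo) sub with
    | none =>
      rw [hfill] at hFm
      exact absurd hFm (by simp)
    | some ns =>
      simp only [hfill] at hFm
      rw [pvFillA_eq sub (pvHolesP sub) combo sub hlenc] at hfill
      by_cases hok : List.Forall₂ (fun v j => v ∈ pvCands sub j) combo (pvHolesP sub)
      · rw [if_pos hok] at hfill
        have hns : ns = pvFilled sub combo := (Option.some.inj hfill).symm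
        by_cases hcond : PySem.Int.band ((pvIntDiffA (ns.take (pvMn sub))).1 +
            (pvIntDiffA (ns.drop (pvMn sub))).1) (2 ^ pvMn sub - 1) = constant
        · rw [if_pos hcond] at hFm
          have hmt : ns = mt := Option.some.inj hFm
          refine ⟨combo, hok, ?_, by rw [← hmt, hns]⟩
          have h := pvValue_eq sub combo hok
          unfold pvCA at h
          rw [← h]
          rw [hns] at hcond
          exact hcond
        · rw [if_neg hcond] at hFm
          simp at hFm
      · rw [if_neg hok] at hfill
        simp at hfill
  · rintro ⟨vs, hok, hcond, rfl⟩
    refine ⟨vs, ?_, ?_⟩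
    · rw [pvProductRepeatA_mem]
      refine ⟨List.Forall₂.length_eq hok, ?_⟩
      intro v hv
      obtain ⟨k, hk, rfl⟩ := List.getElem_of_mem hv
      have hkh : k < (pvHolesP sub).length := by
        have := List.Forall₂.length_eq hok
        omega
      have hmem := pvForall₂_getElem vs (pvHolesP sub) hok k hk hkh
      exact pvCands_subset_possible sub ((pvHolesP sub)[k]) (List.getElem_mem hkh) _ hmem
    · unfold pvFm
      rw [pvFillA_eq sub (pvHolesP sub) vs sub (List.Forall₂.length_eq hok)]
      have hok' : List.Forall₂ (fun v j => v ∈ pvCands sub j) vs (pvHolesP sub) := hok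
      rw [if_pos hok']
      have hca : PySem.Int.band ((pvIntDiffA ((pvFilled sub vs).take (pvMn sub))).1 +
          (pvIntDiffA ((pvFilled sub vs).drop (pvMn sub))).1) (2 ^ pvMn sub - 1) = constant := by
        have h := pvValue_eq sub vs hok
        unfold pvCA at h
        rw [h]
        exact hcond
      show (if PySem.Int.band ((pvIntDiffA ((pvFilled sub vs).take (pvMn sub))).1 +
          (pvIntDiffA ((pvFilled sub vs).drop (pvMn sub))).1) (2 ^ pvMn sub - 1) = constant
        then some (pvFilled sub vs) else none) = some (pvFilled sub vs)
      rw [if_pos hca]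

theorem pvColA_mem (sub : List Char) (constant : Int) (k : Nat)
    (hk : k < (pvHolesP sub).length) (v : Char) :
    v ∈ (pvMatchesA sub constant).map
        (fun mt => PySem.List.pyGetD mt (((pvHolesP sub)[k] : Nat) : Int) ' ')
      ↔ ∃ vs, pvOkay sub vs ∧ PySem.Int.band (pvCB sub vs) (2 ^ pvMn sub - 1) = constant ∧
          vs.getD k ' ' = v := by
  rw [List.mem_map]
  constructor
  · rintro ⟨mt, hmt, hval⟩
    obtain ⟨vs, hok, hcond, rfl⟩ := (pvMatchesA_mem sub constant mt).mp hmt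
    refine ⟨vs, hok, hcond, ?_⟩
    have hlen := List.Forall₂.length_eq hok
    have hjL : (pvHolesP sub)[k] < sub.length := pvHolesP_lt sub _ (List.getElem_mem hk)
    rw [PySem.List.pyGetD_natCast] at hval
    rw [pvFilled_getD sub vs hlen _ hjL] at hval
    have hkv : k < vs.length := by omega
    have hkz : k < ((pvHolesP sub).zip vs).length := by simp [List.length_zip]; omega
    have hz : ((pvHolesP sub).zip vs)[k]'hkz = ((pvHolesP sub)[k], vs[k]) := by
      rw [List.getElem_zip]
    have hpair : ((pvHolesP sub)[k], vs[k]) ∈ (pvHolesP sub).zip vs :=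
      hz ▸ List.getElem_mem hkz
    rw [pvASub_of_pair sub vs hlen _ _ hpair] at hval
    rw [List.getD_eq_getElem vs ' ' hkv]
    exact hval
  · rintro ⟨vs, hok, hcond, hval⟩
    refine ⟨pvFilled sub vs, (pvMatchesA_mem sub constant _).mpr ⟨vs, hok, hcond, rfl⟩, ?_⟩
    have hlen := List.Forall₂.length_eq hok
    have hjL : (pvHolesP sub)[k] < sub.length := pvHolesP_lt sub _ (List.getElem_mem hk)
    rw [PySem.List.pyGetD_natCast]
    rw [pvFilled_getD sub vs hlen _ hjL]
    have hkv : k < vs.length := by omega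
    have hkz : k < ((pvHolesP sub).zip vs).length := by simp [List.length_zip]; omega
    have hz : ((pvHolesP sub).zip vs)[k]'hkz = ((pvHolesP sub)[k], vs[k]) := by
      rw [List.getElem_zip]
    have hpair : ((pvHolesP sub)[k], vs[k]) ∈ (pvHolesP sub).zip vs :=
      hz ▸ List.getElem_mem hkz
    rw [pvASub_of_pair sub vs hlen _ _ hpair]
    rw [← hval, List.getD_eq_getElem vs ' ' hkv]

theorem pvNodupSameMem (s t : List Char) (hs : s.Nodup) (ht : t.Nodup)
    (hmem : ∀ x, x ∈ s ↔ x ∈ t) :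
    s.length = t.length ∧ (s.length = 1 → s.headD ' ' = t.headD ' ') := by
  have hfin : s.toFinset = t.toFinset := by
    ext x
    simp [hmem x]
  have hlen : s.length = t.length := by
    rw [← List.toFinset_card_of_nodup hs, ← List.toFinset_card_of_nodup ht, hfin]
  refine ⟨hlen, ?_⟩
  intro h1
  obtain ⟨a, ha⟩ := List.length_eq_one_iff.mp h1
  obtain ⟨b, hb⟩ := List.length_eq_one_iff.mp (hlen ▸ h1)
  have hab : a = b := by
    have : a ∈ t := (hmem a).mp (by rw [ha]; exact List.mem_cons_self)
    rw [hb] at this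
    simpa using this
  rw [ha, hb, hab]

theorem pvSetLen (s : PySem.Set Char) : (PySem.Set.len s = 1) ↔ s.length = 1 := by
  unfold PySem.Set.len
  constructor <;> intro h <;> omega

def pvRunA (sub : List Char) (constant : Int) : String × String :=
  let possible_gcs := pvPossible sub
  let holes : List Int :=
    ((PySem.List.enumerate sub).filter (fun p => (pvTableA p.2).isSome)).map Prod.fst
  let combos := pvProductRepeatA possible_gcs holes.length
  let m := sub.length / 2
  let matches_ := combos.foldl (fun acc combo =>
    match pvFillA sub (holes.zip combo) sub with
    | none => acc
    | some new_subject =>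
      if PySem.Int.band ((pvIntDiffA (new_subject.take m)).1 +
          (pvIntDiffA (new_subject.drop m)).1) (2 ^ m - 1) = constant
      then acc ++ [new_subject] else acc) []
  let commons := holes.foldl (fun commons i =>
    if PySem.Set.len (PySem.Set.ofList (matches_.map
        (fun mt => PySem.List.pyGetD mt i ' '))) = 1
    then PySem.List.pySetD commons i
      ((matches_.map (fun mt => PySem.List.pyGetD mt i ' ')).headD ' ')
    else commons) sub
  (String.mk (commons.take m), String.mk (commons.drop m))

theorem pvRunA_spec (word_x : String) (word_y : String) (constant : Int) :
    naive_derive_step word_x word_y constant = pvRunA (word_x.toList ++ word_y.toList) constant :=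
  rfl

-- ---------- B-side: table bridge, holes, weights ----------

theorem pvTabB_eq (c : Char) : pvTabB c = (pvTableA c).map String.mk := by
  unfold pvTabB pvTableA
  split <;> simp_all <;> rfl

theorem pvTabB_isSome (c : Char) : (pvTabB c).isSome = (pvTableA c).isSome := by
  rw [pvTabB_eq]; cases pvTableA c <;> rfl

theorem pvTabB_chars (c : Char) : ((pvTabB c).getD "").toList = (pvTableA c).getD [] := by
  rw [pvTabB_eq]
  cases pvTableA c with
  | none => rfl
  | some l => simp only [Option.map_some, Option.getD_some]
              exact Eq.symm ((fun {l} {s} => String.ofList_eq.mp) rfl)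

theorem pvHolesB_eq (sub : List Char) :
    (List.range sub.length).filter (fun j => (pvTabB (sub.getD j ' ')).isSome) = pvHolesP sub := by
  unfold pvHolesP
  apply List.filter_congr
  intro j _
  rw [pvTabB_isSome]

theorem pvTabB_cands (sub : List Char) (j : Nat) :
    ((pvTabB (sub.getD j ' ')).getD "").toList = pvCands sub j := by
  rw [pvTabB_chars]; rfl

theorem pvCands_nodup (sub : List Char) (j : Nat) : (pvCands sub j).Nodup := by
  unfold pvCands pvTableA
  split_ifs <;> simp <;> decide

-- weight as written in B's port (i/t selected first), equal to the proof-side pvWeightF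
def pvWB (sub : List Char) (j : Nat) : Int :=
  let i := if j < pvMn sub then pvMn sub - 1 - j else sub.length - 1 - j
  let t := if j < pvMn sub then (pvS1 sub).1 else (pvS2 sub).1
  if i < t then 2 ^ i else 0

theorem pvWB_eq (sub : List Char) (j : Nat) : pvWB sub j = pvWeightF sub j := by
  unfold pvWB pvWeightF
  by_cases h : j < pvMn sub <;> simp [h]

def pvG (sub : List Char) (j : Nat) (v : Char) : Int := pvDigB v * pvWeightF sub j

def pvBase0 (sub : List Char) : Int := (pvS1 sub).2 + (pvS2 sub).2

def pvContribB (sub : List Char) : List (List Int) :=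
  (pvHolesP sub).map (fun j =>
    ((pvTabB (sub.getD j ' ')).getD "").toList.map (fun v => pvDigB v * pvWB sub j))

theorem pvContribB_eq (sub : List Char) :
    pvContribB sub = (pvHolesP sub).map (fun j => (pvCands sub j).map (pvG sub j)) := by
  unfold pvContribB
  apply List.map_congr_left
  intro j _
  rw [pvTabB_cands]
  apply List.map_congr_left
  intro v _
  rw [pvG, pvWB_eq]

def pvFsetsB (sub : List Char) : List (PySem.Set Int) :=
  pvFwdB (2 ^ pvMn sub) (pvContribB sub)
    (PySem.Set.ofList [PySem.Int.mod ((pvS1 sub).2 + (pvS2 sub).2) (2 ^ pvMn sub)])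

def pvBsetsB (sub : List Char) : List (PySem.Set Int) :=
  pvBwdB (2 ^ pvMn sub) (pvContribB sub).reverse (PySem.Set.ofList [(0 : Int)]) []

def pvAch (sub : List Char) (c : Int) (j : Nat) (con : List Int)
    (fk bn : PySem.Set Int) : List Char :=
  (((pvTabB (sub.getD j ' ')).getD "").toList.zip con).filterMap (fun vd =>
    if bn.any (fun bv => PySem.Set.contains fk (PySem.Int.mod (c - vd.2 - bv) (2 ^ pvMn sub)))
    then some vd.1 else none)

-- the structured form of B's run
def pvRunB' (sub : List Char) (c : Int) : String × String :=
  if c < 0 ∨ (2 : Int) ^ pvMn sub ≤ c then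
    (String.mk (sub.take (pvMn sub)), String.mk (sub.drop (pvMn sub)))
  else
    (fun res => (String.mk (res.take (pvMn sub)), String.mk (res.drop (pvMn sub))))
      ((((pvHolesP sub).zip (pvContribB sub)).zip ((pvFsetsB sub).zip (pvBsetsB sub))).foldl
        (fun res p =>
          if (pvAch sub c p.1.1 p.1.2 p.2.1 p.2.2).length = 1
          then res.set p.1.1 ((pvAch sub c p.1.1 p.1.2 p.2.1 p.2.2).headD ' ') else res) sub)

def pvRunB (sub : List Char) (c : Int) : String × String :=
  let L : Nat := sub.length
  let m : Nat := L / 2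
  let md : Int := 2 ^ m
  if c < 0 ∨ md ≤ c then
    (String.mk (sub.take m), String.mk (sub.drop m))
  else
    let holes : List Nat := (List.range L).filter (fun j => (pvTabB (sub.getD j ' ')).isSome)
    let s1 : Nat × Int := pvScanPartB (sub.take m)
      (PySem.Set.ofList ((holes.filter (fun j => j < m)).map (fun j => m - 1 - j)))
    let s2 : Nat × Int := pvScanPartB (sub.drop m)
      (PySem.Set.ofList ((holes.filter (fun j => ¬ j < m)).map (fun j => L - 1 - j)))
    let w : Nat → Int := fun j =>
      let i := if j < m then m - 1 - j else L - 1 - j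
      let t := if j < m then s1.1 else s2.1
      if i < t then 2 ^ i else 0
    let contrib : List (List Int) := holes.map (fun j =>
      ((pvTabB (sub.getD j ' ')).getD "").toList.map (fun v => pvDigB v * w j))
    let fsets : List (PySem.Set Int) :=
      pvFwdB md contrib (PySem.Set.ofList [PySem.Int.mod (s1.2 + s2.2) md])
    let bsets : List (PySem.Set Int) :=
      pvBwdB md contrib.reverse (PySem.Set.ofList [(0 : Int)]) []
    let res : List Char := ((holes.zip contrib).zip (fsets.zip bsets)).foldl (fun res p =>
      let ach : List Char :=
        (((pvTabB (sub.getD p.1.1 ' ')).getD "").toList.zip p.1.2).filterMap (fun vd =>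
          if p.2.2.any (fun bv => PySem.Set.contains p.2.1 (PySem.Int.mod (c - vd.2 - bv) md))
          then some vd.1 else none)
      if ach.length = 1 then res.set p.1.1 (ach.headD ' ') else res) sub
    (String.mk (res.take m), String.mk (res.drop m))

theorem pvRunB_spec (word_x : String) (word_y : String) (constant : Int) :
    naive_derive_step_alt word_x word_y constant =
      pvRunB (word_x.toList ++ word_y.toList) constant := rfl

theorem pvRunB'_eq (sub : List Char) (c : Int) : pvRunB sub c = pvRunB' sub c := by
  unfold pvRunB pvRunB'
  simp only [pvHolesB_eq]
  rfl

-- ---------- Forall₂ helpers ----------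

theorem pvF2_append {α β : Type} {R : α → β → Prop} :
    ∀ {l1 l2 : List α} {r1 r2 : List β}, List.Forall₂ R l1 r1 → List.Forall₂ R l2 r2 →
      List.Forall₂ R (l1 ++ l2) (r1 ++ r2) := by
  intro l1
  induction l1 with
  | nil => intro l2 r1 r2 h1 h2; cases h1; simpa using h2
  | cons a l1 ih =>
    intro l2 r1 r2 h1 h2
    cases h1 with
    | cons hR htail => exact List.Forall₂.cons hR (ih htail h2)

theorem pvF2_append_singleton_iff {α β : Type} {R : α → β → Prop} :
    ∀ {r1 : List β} {b : β} {l : List α}, List.Forall₂ R l (r1 ++ [b]) ↔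
      ∃ l1 x, l = l1 ++ [x] ∧ List.Forall₂ R l1 r1 ∧ R x b := by
  intro r1
  induction r1 with
  | nil =>
    intro b l
    simp only [List.nil_append]
    rw [List.forall₂_cons_right_iff]
    constructor
    · rintro ⟨a, u', hR, hF, rfl⟩
      cases hF
      exact ⟨[], a, rfl, List.Forall₂.nil, hR⟩
    · rintro ⟨l1, x, rfl, hF, hR⟩
      cases hF
      exact ⟨x, [], hR, List.Forall₂.nil, rfl⟩
  | cons c r1 ih =>
    intro b l
    rw [List.cons_append, List.forall₂_cons_right_iff]
    constructor
    · rintro ⟨a, u', hR, hF, rfl⟩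
      obtain ⟨l1, x, rfl, hF1, hRb⟩ := ih.mp hF
      exact ⟨a :: l1, x, rfl, List.Forall₂.cons hR hF1, hRb⟩
    · rintro ⟨l1, x, hl, hF, hRb⟩
      obtain ⟨a, u', hR, hF1, rfl⟩ := List.forall₂_cons_right_iff.mp hF
      exact ⟨a, u' ++ [x], hR, ih.mpr ⟨u', x, rfl, hF1, hRb⟩, by simpa using hl⟩

-- ---------- forward DP characterization ----------

theorem pvFwdB_length (md : Int) :
    ∀ (cs : List (List Int)) (f : PySem.Set Int), (pvFwdB md cs f).length = cs.length := by
  intro cs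
  induction cs with
  | nil => intro f; rfl
  | cons con rest ih => intro f; simp [pvFwdB, ih]

theorem pvFwdB_mem (md : Int) (hmd : 0 < md) :
    ∀ (cs pre : List (List Int)) (f : PySem.Set Int) (v0 : Int),
      (∀ x, x ∈ f ↔ ∃ ds, List.Forall₂ (fun (d : Int) (con : List Int) => d ∈ con) ds pre ∧
        x = (v0 + ds.sum) % md) →
      ∀ k, k < cs.length → ∀ x,
        (x ∈ (pvFwdB md cs f).getD k [] ↔
          ∃ ds, List.Forall₂ (fun (d : Int) (con : List Int) => d ∈ con) ds (pre ++ cs.take k) ∧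
            x = (v0 + ds.sum) % md) := by
  intro cs
  induction cs with
  | nil => intro pre f v0 hS k hk; simp at hk
  | cons con rest ih =>
    intro pre f v0 hS k hk x
    cases k with
    | zero =>
      simpa [pvFwdB] using hS x
    | succ k =>
      have hstep : ∀ y, y ∈ PySem.Set.ofList
            (f.flatMap (fun fv => con.map (fun d => PySem.Int.mod (fv + d) md))) ↔
          ∃ ds, List.Forall₂ (fun (d : Int) (con : List Int) => d ∈ con) ds (pre ++ [con]) ∧
            y = (v0 + ds.sum) % md := by
        intro y
        rw [PySem.Set.mem_ofList, List.mem_flatMap]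
        constructor
        · rintro ⟨fv, hfv, hy⟩
          obtain ⟨d, hd, rfl⟩ := List.mem_map.mp hy
          obtain ⟨ds, hds, rfl⟩ := (hS fv).mp hfv
          refine ⟨ds ++ [d], pvF2_append_singleton_iff.mpr ⟨ds, d, rfl, hds, hd⟩, ?_⟩
          rw [PySem.Int.mod_eq_emod_of_pos hmd, Int.emod_add_emod]
          simp [add_assoc]
        · rintro ⟨ds', hds', rfl⟩
          obtain ⟨ds, d, rfl, hds, hd⟩ := pvF2_append_singleton_iff.mp hds'
          refine ⟨(v0 + ds.sum) % md, (hS _).mpr ⟨ds, hds, rfl⟩,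
            List.mem_map.mpr ⟨d, hd, ?_⟩⟩
          rw [PySem.Int.mod_eq_emod_of_pos hmd, Int.emod_add_emod]
          simp [add_assoc]
      have := ih (pre ++ [con]) _ v0 hstep k (by simpa using hk) x
      simpa [pvFwdB, List.append_assoc] using this

-- ---------- backward DP characterization ----------

def pvStepBS (md : Int) (con : List Int) (b : PySem.Set Int) : PySem.Set Int :=
  PySem.Set.ofList (con.flatMap (fun d => b.map (fun bv => PySem.Int.mod (d + bv) md)))

def pvBK (md : Int) : List (List Int) → PySem.Set Int
  | [] => PySem.Set.ofList [0]
  | con :: rest => pvStepBS md con (pvBK md rest)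

def pvBwdAux (md : Int) : List (List Int) → PySem.Set Int → List (PySem.Set Int)
  | [], _ => []
  | con :: rest, b => b :: pvBwdAux md rest (pvStepBS md con b)

theorem pvBwdB_aux (md : Int) :
    ∀ (xs : List (List Int)) (b : PySem.Set Int) (acc : List (PySem.Set Int)),
      pvBwdB md xs b acc = (pvBwdAux md xs b).reverse ++ acc := by
  intro xs
  induction xs with
  | nil => intro b acc; simp [pvBwdB, pvBwdAux]
  | cons con rest ih =>
    intro b acc
    show pvBwdB md rest (pvStepBS md con b) (b :: acc) = _
    rw [ih]
    simp [pvBwdAux]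

theorem pvBwdAux_append (md : Int) :
    ∀ (xs ys : List (List Int)) (b : PySem.Set Int),
      pvBwdAux md (xs ++ ys) b =
        pvBwdAux md xs b ++ pvBwdAux md ys (xs.foldl (fun b con => pvStepBS md con b) b) := by
  intro xs
  induction xs with
  | nil => intro ys b; simp [pvBwdAux]
  | cons con rest ih =>
    intro ys b
    simp only [List.cons_append, pvBwdAux, List.foldl_cons]
    rw [ih]

theorem pvFoldRevBK (md : Int) :
    ∀ (l : List (List Int)),
      l.reverse.foldl (fun b con => pvStepBS md con b) (PySem.Set.ofList [0]) = pvBK md l := by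
  intro l
  induction l with
  | nil => rfl
  | cons con rest ih =>
    simp only [List.reverse_cons, List.foldl_append, List.foldl_cons, List.foldl_nil, ih]
    rfl

theorem pvBsets_eq_map (md : Int) :
    ∀ (l : List (List Int)),
      pvBwdB md l.reverse (PySem.Set.ofList [0]) [] =
        (List.range l.length).map (fun k => pvBK md (l.drop (k + 1))) := by
  intro l
  induction l with
  | nil => rfl
  | cons con rest ih =>
    rw [pvBwdB_aux]
    simp only [List.reverse_cons, List.append_nil]
    rw [pvBwdAux_append]
    have h1 : pvBwdAux md [con] (rest.reverse.foldl (fun b c => pvStepBS md c b)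
        (PySem.Set.ofList [0])) = [pvBK md rest] := by
      rw [pvFoldRevBK]
      rfl
    rw [h1, List.reverse_append]
    have h2 : (pvBwdAux md rest.reverse (PySem.Set.ofList [0])).reverse =
        (List.range rest.length).map (fun k => pvBK md (rest.drop (k + 1))) := by
      rw [← ih, pvBwdB_aux]
      simp
    rw [h2]
    simp only [List.length_cons, List.range_succ_eq_map, List.map_cons, List.map_map]
    rfl

theorem pvBK_mem (md : Int) (hmd : 0 < md) :
    ∀ (cs : List (List Int)) (x : Int),
      x ∈ pvBK md cs ↔ ∃ ds, List.Forall₂ (fun (d : Int) (con : List Int) => d ∈ con) ds cs ∧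
        x = ds.sum % md := by
  intro cs
  induction cs with
  | nil =>
    intro x
    simp only [pvBK, PySem.Set.mem_ofList, List.mem_singleton]
    constructor
    · rintro rfl
      exact ⟨[], List.Forall₂.nil, by simp⟩
    · rintro ⟨ds, hds, rfl⟩
      cases hds
      simp
  | cons con rest ih =>
    intro x
    simp only [pvBK, pvStepBS, PySem.Set.mem_ofList, List.mem_flatMap]
    constructor
    · rintro ⟨d, hd, hy⟩
      obtain ⟨bv, hbv, rfl⟩ := List.mem_map.mp hy
      obtain ⟨ds, hds, rfl⟩ := (ih bv).mp hbv
      refine ⟨d :: ds, List.Forall₂.cons hd hds, ?_⟩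
      rw [PySem.Int.mod_eq_emod_of_pos hmd, Int.add_emod_emod]
      simp
    · rintro ⟨ds', hds', rfl⟩
      obtain ⟨d, ds, hd, hds, rfl⟩ := List.forall₂_cons_right_iff.mp hds'
      refine ⟨d, hd, List.mem_map.mpr ⟨ds.sum % md, (ih _).mpr ⟨ds, hds, rfl⟩, ?_⟩⟩
      rw [PySem.Int.mod_eq_emod_of_pos hmd, Int.add_emod_emod]
      simp

-- ---------- per-hole achievable characterization ----------

theorem pvFilterMapZipMap {α β : Type} (f : α → β) (p : β → Bool) :
    ∀ (l : List α),
      (l.zip (l.map f)).filterMap (fun vd => if p vd.2 then some vd.1 else none) =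
        l.filter (fun v => p (f v)) := by
  intro l
  induction l with
  | nil => rfl
  | cons a l ih =>
    simp only [List.map_cons, List.zip_cons_cons, List.filterMap_cons, List.filter_cons]
    by_cases h : p (f a) = true
    · simp only [h, if_true]
      rw [ih]
    · simp only [h, Bool.false_eq_true, if_false]
      rw [ih]

theorem pvDsChar (sub : List Char) :
    ∀ (hs : List Nat) (ds : List Int),
      List.Forall₂ (fun (d : Int) (con : List Int) => d ∈ con)
          ds (hs.map (fun j => (pvCands sub j).map (pvG sub j))) ↔
        ∃ vs, List.Forall₂ (fun v j => v ∈ pvCands sub j) vs hs ∧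
          ds = (vs.zip hs).map (fun p => pvG sub p.2 p.1) := by
  intro hs
  induction hs with
  | nil =>
    intro ds
    constructor
    · intro h; cases h; exact ⟨[], List.Forall₂.nil, rfl⟩
    · rintro ⟨vs, hvs, rfl⟩; cases hvs; exact List.Forall₂.nil
  | cons j hs ih =>
    intro ds
    simp only [List.map_cons]
    rw [List.forall₂_cons_right_iff]
    constructor
    · rintro ⟨d, ds', hd, hds, rfl⟩
      obtain ⟨v, hv, rfl⟩ := List.mem_map.mp hd
      obtain ⟨vs, hvs, rfl⟩ := (ih ds').mp hds
      exact ⟨v :: vs, List.Forall₂.cons hv hvs, by simp⟩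
    · rintro ⟨vs, hvs, rfl⟩
      obtain ⟨v, vs', hv, hvs', rfl⟩ := List.forall₂_cons_right_iff.mp hvs
      exact ⟨pvG sub j v, _, List.mem_map_of_mem hv, (ih _).mpr ⟨vs', hvs', rfl⟩, by simp⟩

theorem pvCB_sum (sub : List Char) (vs : List Char)
    (hlen : vs.length = (pvHolesP sub).length) :
    pvCB sub vs = pvBase0 sub + ((vs.zip (pvHolesP sub)).map (fun p => pvG sub p.2 p.1)).sum := by
  unfold pvCB pvBase0
  rw [pvFoldDigit]
  rw [List.zip_map_right, List.map_map]
  have hfun : ((fun vw : Char × Int => pvDigB vw.1 * vw.2) ∘ (Prod.map id (pvWeightF sub)))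
      = fun p : Char × Nat => pvG sub p.2 p.1 := by
    funext p
    cases p
    rfl
  rw [hfun]

theorem pvZipSplit {α β : Type} (F : α × β → Int) :
    ∀ (l1 : List α) (l2 : List β) (k : Nat) (hlen : l1.length = l2.length)
      (hk : k < l2.length),
      ((l1.zip l2).map F).sum
        = (((l1.take k).zip (l2.take k)).map F).sum
          + F (l1[k]'(by omega), l2[k]'hk)
          + (((l1.drop (k + 1)).zip (l2.drop (k + 1))).map F).sum := by
  intro l1 l2 k hlen hk
  have hk1 : k < l1.length := by omega
  have e1 : l1 = l1.take k ++ l1[k]'hk1 :: l1.drop (k + 1) := by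
    conv_lhs => rw [← List.take_append_drop k l1]
    rw [List.drop_eq_getElem_cons hk1]
  have e2 : l2 = l2.take k ++ l2[k]'hk :: l2.drop (k + 1) := by
    conv_lhs => rw [← List.take_append_drop k l2]
    rw [List.drop_eq_getElem_cons hk]
  have hlt : (l1.take k).length = (l2.take k).length := by
    simp [List.length_take]; omega
  conv_lhs => rw [e1, e2]
  rw [List.zip_append hlt, List.map_append, List.sum_append, List.zip_cons_cons,
    List.map_cons, List.sum_cons]
  ring

theorem pvGetD_append_mid (l1 : List Char) (v : Char) (l2 : List Char) :
    (l1 ++ v :: l2).getD l1.length ' ' = v := by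
  rw [List.getD_eq_getElem _ _ (by simp)]
  rw [List.getElem_append_right (le_refl l1.length)]
  simp

theorem pvContribB_length (sub : List Char) :
    (pvContribB sub).length = (pvHolesP sub).length := by
  rw [pvContribB_eq]; simp

theorem pvFsetsB_mem (sub : List Char) (k : Nat) (hk : k < (pvHolesP sub).length) (x : Int) :
    x ∈ (pvFsetsB sub).getD k [] ↔
      ∃ vs1, List.Forall₂ (fun v j => v ∈ pvCands sub j) vs1 ((pvHolesP sub).take k) ∧
        x = (pvBase0 sub +
          ((vs1.zip ((pvHolesP sub).take k)).map (fun p => pvG sub p.2 p.1)).sum)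
            % 2 ^ pvMn sub := by
  have hmd : (0 : Int) < 2 ^ pvMn sub := by positivity
  have hS0 : ∀ y, y ∈ (PySem.Set.ofList
        [PySem.Int.mod ((pvS1 sub).2 + (pvS2 sub).2) (2 ^ pvMn sub)] : PySem.Set Int) ↔
      ∃ ds, List.Forall₂ (fun (d : Int) (con : List Int) => d ∈ con) ds ([] : List (List Int)) ∧
        y = (pvBase0 sub + ds.sum) % 2 ^ pvMn sub := by
    intro y
    simp only [PySem.Set.mem_ofList, List.mem_singleton]
    constructor
    · rintro rfl
      exact ⟨[], List.Forall₂.nil, by simp [pvBase0, PySem.Int.mod_eq_emod_of_pos hmd]⟩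
    · rintro ⟨ds, hds, rfl⟩
      cases hds
      simp [pvBase0, PySem.Int.mod_eq_emod_of_pos hmd]
  have hmain := pvFwdB_mem (2 ^ pvMn sub) hmd (pvContribB sub) [] _ (pvBase0 sub) hS0 k
    (by rw [pvContribB_length]; exact hk) x
  rw [List.nil_append] at hmain
  have htake : (pvContribB sub).take k =
      ((pvHolesP sub).take k).map (fun j => (pvCands sub j).map (pvG sub j)) := by
    rw [pvContribB_eq, List.map_take]
  rw [htake] at hmain
  unfold pvFsetsB
  rw [hmain]
  constructor
  · rintro ⟨ds, hds, rfl⟩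
    obtain ⟨vs1, hvs1, rfl⟩ := (pvDsChar sub _ ds).mp hds
    exact ⟨vs1, hvs1, rfl⟩
  · rintro ⟨vs1, hvs1, rfl⟩
    exact ⟨_, (pvDsChar sub _ _).mpr ⟨vs1, hvs1, rfl⟩, rfl⟩

theorem pvFsetsB_length (sub : List Char) :
    (pvFsetsB sub).length = (pvHolesP sub).length := by
  unfold pvFsetsB
  rw [pvFwdB_length, pvContribB_length]

theorem pvBsetsB_length (sub : List Char) :
    (pvBsetsB sub).length = (pvHolesP sub).length := by
  unfold pvBsetsB
  rw [pvBsets_eq_map]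
  rw [List.length_map, List.length_range, pvContribB_length]

theorem pvBsetsB_mem (sub : List Char) (k : Nat) (hk : k < (pvHolesP sub).length) (x : Int) :
    x ∈ (pvBsetsB sub).getD k [] ↔
      ∃ vs2, List.Forall₂ (fun v j => v ∈ pvCands sub j) vs2 ((pvHolesP sub).drop (k + 1)) ∧
        x = (((vs2.zip ((pvHolesP sub).drop (k + 1))).map (fun p => pvG sub p.2 p.1)).sum)
          % 2 ^ pvMn sub := by
  have hmd : (0 : Int) < 2 ^ pvMn sub := by positivity
  unfold pvBsetsB
  rw [pvBsets_eq_map]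
  have hgd : ((List.range (pvContribB sub).length).map
        (fun k => pvBK (2 ^ pvMn sub) ((pvContribB sub).drop (k + 1)))).getD k [] =
      pvBK (2 ^ pvMn sub) ((pvContribB sub).drop (k + 1)) := by
    rw [List.getD_eq_getElem _ _ (by rw [List.length_map, List.length_range, pvContribB_length]; exact hk)]
    rw [List.getElem_map, List.getElem_range]
  rw [hgd, pvBK_mem _ hmd]
  have hdrop : (pvContribB sub).drop (k + 1) =
      ((pvHolesP sub).drop (k + 1)).map (fun j => (pvCands sub j).map (pvG sub j)) := by
    rw [pvContribB_eq, List.map_drop]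
  rw [hdrop]
  constructor
  · rintro ⟨ds, hds, rfl⟩
    obtain ⟨vs2, hvs2, rfl⟩ := (pvDsChar sub _ ds).mp hds
    exact ⟨vs2, hvs2, rfl⟩
  · rintro ⟨vs2, hvs2, rfl⟩
    exact ⟨_, (pvDsChar sub _ _).mpr ⟨vs2, hvs2, rfl⟩, rfl⟩

theorem pvMod3add (a d b md : Int) : (a % md + d + b % md) % md = (a + d + b) % md := by
  have h1 : Int.ModEq md (a % md) a := Int.emod_emod_of_dvd a dvd_rfl
  have h2 : Int.ModEq md (b % md) b := Int.emod_emod_of_dvd b dvd_rfl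
  exact (h1.add_right d).add h2

theorem pvMod3sub (x d b md : Int) : (x % md - d - b % md) % md = (x - d - b) % md := by
  have h1 : Int.ModEq md (x % md) x := Int.emod_emod_of_dvd x dvd_rfl
  have h2 : Int.ModEq md (b % md) b := Int.emod_emod_of_dvd b dvd_rfl
  exact (h1.sub_right d).sub h2

theorem pvTakeMid {α : Type} : ∀ (l1 : List α) (v : α) (l2 : List α),
    (l1 ++ v :: l2).take l1.length = l1 := by
  intro l1 v l2
  induction l1 with
  | nil => rfl
  | cons a l1 ih => simpa using ih

theorem pvDropMid {α : Type} : ∀ (l1 : List α) (v : α) (l2 : List α),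
    (l1 ++ v :: l2).drop (l1.length + 1) = l2 := by
  intro l1 v l2
  induction l1 with
  | nil => rfl
  | cons a l1 ih => simpa using ih

theorem pvModFinal (base S1 d S2 c bv md : Int) (hc0 : 0 ≤ c) (hc1 : c < md)
    (hf : (c - d - bv) % md = (base + S1) % md) (hbv : bv = S2 % md) :
    (base + (S1 + d + S2)) % md = c := by
  have h1 : Int.ModEq md ((c - d - bv) % md) (c - d - bv) := Int.emod_emod_of_dvd _ dvd_rfl
  calc (base + (S1 + d + S2)) % md
      = (base + S1 + d + S2) % md := by rw [show base + (S1 + d + S2) = base + S1 + d + S2 from by ring]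
    _ = ((base + S1) % md + d + S2 % md) % md := (pvMod3add _ _ _ _).symm
    _ = ((c - d - bv) % md + d + bv) % md := by rw [hf, hbv]
    _ = ((c - d - bv) + d + bv) % md := (h1.add_right d).add_right bv
    _ = c % md := by rw [show c - d - bv + d + bv = c from by ring]
    _ = c := Int.emod_eq_of_lt hc0 hc1

theorem pvModFinal2 (base S1 d S2 c md : Int)
    (h : (base + (S1 + d + S2)) % md = c) :
    (c - d - S2 % md) % md = (base + S1) % md := by
  rw [← h]
  rw [pvMod3sub]
  rw [show base + (S1 + d + S2) - d - S2 = base + S1 from by ring]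

theorem pvAch_mem (sub : List Char) (c : Int) (hc0 : 0 ≤ c) (hc1 : c < 2 ^ pvMn sub)
    (k : Nat) (hk : k < (pvHolesP sub).length) (v : Char) :
    v ∈ pvAch sub c ((pvHolesP sub)[k]) ((pvContribB sub).getD k [])
        ((pvFsetsB sub).getD k []) ((pvBsetsB sub).getD k []) ↔
      ∃ vs, pvOkay sub vs ∧ pvCB sub vs % 2 ^ pvMn sub = c ∧ vs.getD k ' ' = v := by
  have hmd : (0 : Int) < 2 ^ pvMn sub := by positivity
  have hcon : (pvContribB sub).getD k [] =
      (pvCands sub ((pvHolesP sub)[k])).map (pvG sub ((pvHolesP sub)[k])) := by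
    rw [pvContribB_eq, List.getD_eq_getElem _ _ (by simpa using hk), List.getElem_map]
  unfold pvAch
  rw [pvTabB_cands, hcon, pvFilterMapZipMap (pvG sub ((pvHolesP sub)[k]))
    (fun d => ((pvBsetsB sub).getD k []).any (fun bv =>
      PySem.Set.contains ((pvFsetsB sub).getD k []) (PySem.Int.mod (c - d - bv) (2 ^ pvMn sub)))),
    List.mem_filter]
  constructor
  · rintro ⟨hv, hP⟩
    rw [List.any_eq_true] at hP
    obtain ⟨bv, hbvmem, hbvP⟩ := hP
    rw [PySem.Set.contains_iff] at hbvP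
    rw [PySem.Int.mod_eq_emod_of_pos hmd] at hbvP
    obtain ⟨vs2, hvs2, hbv⟩ := (pvBsetsB_mem sub k hk bv).mp hbvmem
    obtain ⟨vs1, hvs1, hf⟩ := (pvFsetsB_mem sub k hk _).mp hbvP
    have hl1 : vs1.length = k := by
      have := List.Forall₂.length_eq hvs1
      simpa [List.length_take, Nat.min_eq_left (Nat.le_of_lt hk)] using this
    have hholes : pvHolesP sub =
        (pvHolesP sub).take k ++ (pvHolesP sub)[k] :: (pvHolesP sub).drop (k + 1) := by
      conv_lhs => rw [← List.take_append_drop k (pvHolesP sub)]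
      rw [List.drop_eq_getElem_cons hk]
    have hok : pvOkay sub (vs1 ++ v :: vs2) := by
      have h := pvF2_append hvs1 (List.Forall₂.cons hv hvs2)
      rw [pvOkay]
      rwa [← hholes] at h
    have hlenvs : (vs1 ++ v :: vs2).length = (pvHolesP sub).length := List.Forall₂.length_eq hok
    have htk : (vs1 ++ v :: vs2).take k = vs1 := by rw [← hl1]; exact pvTakeMid vs1 v vs2
    have hdp : (vs1 ++ v :: vs2).drop (k + 1) = vs2 := by
      rw [← hl1]; exact pvDropMid vs1 v vs2
    have hgdv : (vs1 ++ v :: vs2).getD k ' ' = v := by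
      rw [← hl1]; exact pvGetD_append_mid vs1 v vs2
    have hkvs : k < (vs1 ++ v :: vs2).length := by omega
    have hgek : (vs1 ++ v :: vs2)[k] = v := by
      rw [← List.getD_eq_getElem _ ' ' hkvs]
      exact hgdv
    refine ⟨vs1 ++ v :: vs2, hok, ?_, hgdv⟩
    rw [pvCB_sum sub _ hlenvs]
    have hsplit := pvZipSplit (fun p => pvG sub p.2 p.1) (vs1 ++ v :: vs2) (pvHolesP sub) k
      hlenvs hk
    rw [htk, hdp] at hsplit
    simp only [hgek] at hsplit
    rw [hsplit]
    exact pvModFinal _ _ _ _ _ _ _ hc0 hc1 hf hbv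
  · rintro ⟨vs, hok, hcb, hgd⟩
    have hlenvs : vs.length = (pvHolesP sub).length := List.Forall₂.length_eq hok
    have hkv : k < vs.length := by omega
    have hvk : vs[k] = v := by rw [← hgd, List.getD_eq_getElem _ ' ' hkv]
    have hvmem : v ∈ pvCands sub ((pvHolesP sub)[k]) := by
      have := pvForall₂_getElem vs (pvHolesP sub) hok k hkv hk
      rwa [hvk] at this
    refine ⟨hvmem, ?_⟩
    rw [List.any_eq_true]
    have hvs1 := List.forall₂_take k hok
    have hvs2 := List.forall₂_drop (k + 1) hok
    refine ⟨(((vs.drop (k + 1)).zip ((pvHolesP sub).drop (k + 1))).map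
        (fun p => pvG sub p.2 p.1)).sum % 2 ^ pvMn sub,
      (pvBsetsB_mem sub k hk _).mpr ⟨vs.drop (k + 1), hvs2, rfl⟩, ?_⟩
    rw [PySem.Set.contains_iff]
    rw [PySem.Int.mod_eq_emod_of_pos hmd]
    rw [pvFsetsB_mem sub k hk]
    refine ⟨vs.take k, hvs1, ?_⟩
    have hsplit := pvZipSplit (fun p => pvG sub p.2 p.1) vs (pvHolesP sub) k hlenvs hk
    simp only [hvk] at hsplit
    have hc' : (pvBase0 sub +
        ((((vs.take k).zip ((pvHolesP sub).take k)).map (fun p => pvG sub p.2 p.1)).sum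
          + pvG sub ((pvHolesP sub)[k]) v
          + (((vs.drop (k + 1)).zip ((pvHolesP sub).drop (k + 1))).map
              (fun p => pvG sub p.2 p.1)).sum)) % 2 ^ pvMn sub = c := by
      rw [← hcb, pvCB_sum sub vs hlenvs, hsplit]
    exact pvModFinal2 _ _ _ _ _ _ hc'

-- ---------- per-column decision and final fold ----------

theorem pvDecisionNew (sub : List Char) (c : Int) (hc0 : 0 ≤ c) (hc1 : c < 2 ^ pvMn sub)
    (k : Nat) (hk : k < (pvHolesP sub).length) :
    ((PySem.Set.len (PySem.Set.ofList ((pvMatchesA sub c).map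
        (fun mt => PySem.List.pyGetD mt (((pvHolesP sub)[k] : Nat) : Int) ' '))) = 1) ↔
      ((pvAch sub c ((pvHolesP sub)[k]) ((pvContribB sub).getD k [])
          ((pvFsetsB sub).getD k []) ((pvBsetsB sub).getD k [])).length = 1)) ∧
    ((pvAch sub c ((pvHolesP sub)[k]) ((pvContribB sub).getD k [])
        ((pvFsetsB sub).getD k []) ((pvBsetsB sub).getD k [])).length = 1 →
      ((pvMatchesA sub c).map
        (fun mt => PySem.List.pyGetD mt (((pvHolesP sub)[k] : Nat) : Int) ' ')).headD ' '
      = (pvAch sub c ((pvHolesP sub)[k]) ((pvContribB sub).getD k [])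
          ((pvFsetsB sub).getD k []) ((pvBsetsB sub).getD k [])).headD ' ') := by
  have hcon : (pvContribB sub).getD k [] =
      (pvCands sub ((pvHolesP sub)[k])).map (pvG sub ((pvHolesP sub)[k])) := by
    rw [pvContribB_eq, List.getD_eq_getElem _ _ (by simpa using hk), List.getElem_map]
  have hmem : ∀ x, x ∈ PySem.Set.ofList ((pvMatchesA sub c).map
      (fun mt => PySem.List.pyGetD mt (((pvHolesP sub)[k] : Nat) : Int) ' ')) ↔
      x ∈ pvAch sub c ((pvHolesP sub)[k]) ((pvContribB sub).getD k [])
        ((pvFsetsB sub).getD k []) ((pvBsetsB sub).getD k []) := by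
    intro x
    rw [PySem.Set.mem_ofList, pvColA_mem sub c k hk x, pvAch_mem sub c hc0 hc1 k hk x]
    constructor
    · rintro ⟨vs, hok, hband, hgd⟩
      refine ⟨vs, hok, ?_, hgd⟩
      rw [← pvBandMask]
      exact hband
    · rintro ⟨vs, hok, hmod, hgd⟩
      refine ⟨vs, hok, ?_, hgd⟩
      rw [pvBandMask]
      exact hmod
  have hndA : (PySem.Set.ofList ((pvMatchesA sub c).map
      (fun mt => PySem.List.pyGetD mt (((pvHolesP sub)[k] : Nat) : Int) ' '))).Nodup :=
    PySem.Set.nodup_ofList _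
  have hndB : (pvAch sub c ((pvHolesP sub)[k]) ((pvContribB sub).getD k [])
      ((pvFsetsB sub).getD k []) ((pvBsetsB sub).getD k [])).Nodup := by
    unfold pvAch
    rw [pvTabB_cands, hcon, pvFilterMapZipMap (pvG sub ((pvHolesP sub)[k]))
      (fun d => ((pvBsetsB sub).getD k []).any (fun bv =>
        PySem.Set.contains ((pvFsetsB sub).getD k [])
          (PySem.Int.mod (c - d - bv) (2 ^ pvMn sub))))]
    exact List.Nodup.filter _ (pvCands_nodup sub _)
  have key := pvNodupSameMem _ _ hndA hndB hmem
  constructor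
  · rw [pvSetLen, key.1]
  · intro h1
    have h0 : (PySem.Set.ofList ((pvMatchesA sub c).map
        (fun mt => PySem.List.pyGetD mt (((pvHolesP sub)[k] : Nat) : Int) ' '))).length = 1 := by
      rw [key.1]
      exact h1
    have hhead := key.2 h0
    obtain ⟨a, ha⟩ := List.length_eq_one_iff.mp h0
    set colA := (pvMatchesA sub c).map
      (fun mt => PySem.List.pyGetD mt (((pvHolesP sub)[k] : Nat) : Int) ' ') with hcolAdef
    have hall : ∀ x ∈ colA, x = a := by
      intro x hx
      have hxx : x ∈ PySem.Set.ofList colA := (PySem.Set.mem_ofList colA x).mpr hx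
      rw [ha] at hxx
      simpa using hxx
    have hne : colA ≠ [] := by
      intro hnil
      rw [hnil] at ha
      simp [PySem.Set.ofList] at ha
    cases hcol : colA with
    | nil => exact absurd hcol hne
    | cons c0 rest =>
      have hc0' : c0 = a := hall c0 (by rw [hcol]; exact List.mem_cons_self)
      have hofhead : (PySem.Set.ofList colA).headD ' ' = a := by rw [ha]; rfl
      simp only [List.headD_cons]
      rw [hc0', ← hofhead]
      exact hhead

theorem pvFoldMatch (colf : Nat → List Char)
    (achOf : (Nat × List Int) × (PySem.Set Int × PySem.Set Int) → List Char) :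
    ∀ (hs : List Nat) (l : List ((Nat × List Int) × (PySem.Set Int × PySem.Set Int)))
      (acc : List Char),
      List.Forall₂ (fun (j : Nat) q => q.1.1 = j ∧
        ((PySem.Set.len (PySem.Set.ofList (colf j)) = 1) ↔ ((achOf q).length = 1)) ∧
        ((achOf q).length = 1 → (colf j).headD ' ' = (achOf q).headD ' ')) hs l →
      hs.foldl (fun commons j =>
        if PySem.Set.len (PySem.Set.ofList (colf j)) = 1
        then commons.set j ((colf j).headD ' ') else commons) acc
      = l.foldl (fun res q =>
          if (achOf q).length = 1 then res.set q.1.1 ((achOf q).headD ' ') else res) acc := by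
  intro hs
  induction hs with
  | nil => intro l acc h; cases h; rfl
  | cons j hs ih =>
    intro l acc h
    obtain ⟨q, l', ⟨hq1, hq2, hq3⟩, htail, rfl⟩ := List.forall₂_cons_left_iff.mp h
    simp only [List.foldl_cons]
    by_cases hd : (achOf q).length = 1
    · rw [if_pos (hq2.mpr hd), if_pos hd, hq3 hd, hq1]
      exact ih l' _ htail
    · rw [if_neg (fun hA => hd (hq2.mp hA)), if_neg hd]
      exact ih l' _ htail

theorem pvCommons_eq (sub : List Char) (c : Int) (hc0 : 0 ≤ c) (hc1 : c < 2 ^ pvMn sub) :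
    ((pvHolesP sub).map (fun (j : Nat) => (j : Int))).foldl (fun commons i =>
        if PySem.Set.len (PySem.Set.ofList ((pvMatchesA sub c).map
            (fun mt => PySem.List.pyGetD mt i ' '))) = 1
        then PySem.List.pySetD commons i
          (((pvMatchesA sub c).map (fun mt => PySem.List.pyGetD mt i ' ')).headD ' ')
        else commons) sub
    = (((pvHolesP sub).zip (pvContribB sub)).zip ((pvFsetsB sub).zip (pvBsetsB sub))).foldl
        (fun res p =>
          if (pvAch sub c p.1.1 p.1.2 p.2.1 p.2.2).length = 1
          then res.set p.1.1 ((pvAch sub c p.1.1 p.1.2 p.2.1 p.2.2).headD ' ') else res) sub := by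
  rw [List.foldl_map]
  have hbody : (fun (commons : List Char) (j : Nat) =>
      if PySem.Set.len (PySem.Set.ofList ((pvMatchesA sub c).map
          (fun mt => PySem.List.pyGetD mt ((j : Int)) ' '))) = 1
      then PySem.List.pySetD commons ((j : Int))
        (((pvMatchesA sub c).map (fun mt => PySem.List.pyGetD mt ((j : Int)) ' ')).headD ' ')
      else commons)
    = (fun (commons : List Char) (j : Nat) =>
      if PySem.Set.len (PySem.Set.ofList ((pvMatchesA sub c).map
          (fun mt => PySem.List.pyGetD mt ((j : Int)) ' '))) = 1
      then commons.set j (((pvMatchesA sub c).map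
          (fun mt => PySem.List.pyGetD mt ((j : Int)) ' ')).headD ' ')
      else commons) := by
    funext commons j
    by_cases h : PySem.Set.len (PySem.Set.ofList ((pvMatchesA sub c).map
        (fun mt => PySem.List.pyGetD mt ((j : Int)) ' '))) = 1
    · rw [if_pos h, if_pos h, PySem.List.pySetD_natCast]
    · rw [if_neg h, if_neg h]
  rw [hbody]
  apply pvFoldMatch
    (fun j => (pvMatchesA sub c).map (fun mt => PySem.List.pyGetD mt ((j : Int)) ' '))
    (fun q => pvAch sub c q.1.1 q.1.2 q.2.1 q.2.2)
  apply pvForall₂_of_getElem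
  · simp [List.length_zip, pvContribB_length, pvFsetsB_length, pvBsetsB_length]
  · intro k h1 h2
    have hkc : k < (pvContribB sub).length := by rw [pvContribB_length]; exact h1
    have hkf : k < (pvFsetsB sub).length := by rw [pvFsetsB_length]; exact h1
    have hkb : k < (pvBsetsB sub).length := by rw [pvBsetsB_length]; exact h1
    have e : (((pvHolesP sub).zip (pvContribB sub)).zip
        ((pvFsetsB sub).zip (pvBsetsB sub)))[k]'h2 =
        (((pvHolesP sub)[k]'h1, (pvContribB sub)[k]'hkc),
         ((pvFsetsB sub)[k]'hkf, (pvBsetsB sub)[k]'hkb)) := by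
      rw [List.getElem_zip, List.getElem_zip, List.getElem_zip]
    rw [e]
    have d := pvDecisionNew sub c hc0 hc1 k h1
    rw [List.getD_eq_getElem (pvContribB sub) [] hkc,
      List.getD_eq_getElem (pvFsetsB sub) [] hkf,
      List.getD_eq_getElem (pvBsetsB sub) [] hkb] at d
    exact ⟨rfl, d.1, d.2⟩

-- ---------- unreachable-target branch ----------

theorem pvMatchesA_nil (sub : List Char) (c : Int)
    (hg : c < 0 ∨ (2 : Int) ^ pvMn sub ≤ c) : pvMatchesA sub c = [] := by
  unfold pvMatchesA
  rw [List.filterMap_eq_nil_iff]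
  intro combo _
  unfold pvFm
  cases hfill : pvFillA sub (((pvHolesP sub).map (fun (j : Nat) => (j : Int))).zip combo) sub with
  | none => rfl
  | some ns =>
    show (if PySem.Int.band ((pvIntDiffA (List.take (pvMn sub) ns)).1 +
        (pvIntDiffA (List.drop (pvMn sub) ns)).1) (2 ^ pvMn sub - 1) = c
      then some ns else none) = none
    rw [if_neg]
    rw [pvBandMask]
    have hmd : (0 : Int) < 2 ^ pvMn sub := by positivity
    have h0 := Int.emod_nonneg ((pvIntDiffA (ns.take (pvMn sub))).1 +
      (pvIntDiffA (ns.drop (pvMn sub))).1) (by omega : (2 : Int) ^ pvMn sub ≠ 0)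
    have h1 := Int.emod_lt_of_pos ((pvIntDiffA (ns.take (pvMn sub))).1 +
      (pvIntDiffA (ns.drop (pvMn sub))).1) hmd
    intro heq
    rcases hg with hg | hg
    · omega
    · omega

theorem pvFoldNoMatch (l : List Int) (sub : List Char) :
    l.foldl (fun commons i =>
      if PySem.Set.len (PySem.Set.ofList (([] : List (List Char)).map
          (fun mt => PySem.List.pyGetD mt i ' '))) = 1
      then PySem.List.pySetD commons i ((([] : List (List Char)).map
          (fun mt => PySem.List.pyGetD mt i ' ')).headD ' ')
      else commons) sub = sub := by
  have hbody : (fun (commons : List Char) (i : Int) =>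
      if PySem.Set.len (PySem.Set.ofList (([] : List (List Char)).map
          (fun mt => PySem.List.pyGetD mt i ' '))) = 1
      then PySem.List.pySetD commons i ((([] : List (List Char)).map
          (fun mt => PySem.List.pyGetD mt i ' ')).headD ' ')
      else commons) = fun commons _ => commons := by
    funext commons i
    rw [if_neg]
    intro h
    simp [PySem.Set.len, PySem.Set.ofList] at h
  rw [hbody]
  exact List.foldl_fixed l

-- ---------- assembly ----------

theorem pvRun_eq (sub : List Char) (c : Int) : pvRunA sub c = pvRunB' sub c := by
  simp only [pvRunA, pvRunB']
  rw [pvHolesA_eq]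
  rw [List.length_map]
  rw [show sub.length / 2 = pvMn sub from rfl]
  rw [pvMatchesA_foldl sub c]
  rw [List.nil_append]
  rw [show (pvProductRepeatA (pvPossible sub) (pvHolesP sub).length).filterMap
      (pvFm sub c) = pvMatchesA sub c from rfl]
  by_cases hg : c < 0 ∨ (2 : Int) ^ pvMn sub ≤ c
  · rw [if_pos hg, pvMatchesA_nil sub c hg, pvFoldNoMatch]
  · rw [if_neg hg]
    push_neg at hg
    obtain ⟨hc0, hc1⟩ := hg
    rw [pvCommons_eq sub c hc0 hc1]

theorem pv_main (word_x : String) (word_y : String) (constant : Int) :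
    naive_derive_step word_x word_y constant = naive_derive_step_alt word_x word_y constant := by
  rw [pvRunA_spec, pvRunB_spec, pvRunB'_eq, pvRun_eq]

-- ===== VERDICT (by name: the statement is the Claim_ definition above) =====
theorem naive_derive_step_spec : Claim_equal_naive_derive_step := by
  intro word_x word_y constant _
  unfold Spec_naive_derive_step
  exact pv_main word_x word_y constant
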